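-- pv_equiv track=rewrite | github.com/tjwdud/algorithmCode | PythonCode/shortestPathGraph/rank.py | solution
-- ===== SOURCE A (Python) =====
-- INF = int(1e9)
--
-- def solution(n, results):
--     answer = 0
--     graph = [[INF] * (n+1) for _ in range(n+1)]
--     for a,b in results:
--         graph[a][b] = 1
--     #자기자신으로 가는경우 0
--     for a in range(1, n+1):
--         for b in range(1,n+1):
--             if a == b:
--                 graph[a][b] = 0
--     #해당 노드로 오거나 갈수있으면 순위비교가 가능한것
--     for k in range(1,n+1):
--         for a in range(1,n+1):
--             for b in range(1,n+1):
--                 graph[a][b] = min(graph[a][k]+graph[k][b],graph[a][b])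
--     count = 0
--     for i in range(1,n+1):
--         count = 0
--         for j in range(1, n+1):
--             #해당 노드로 오거나 갈 수 있으면 순위비교 가능
--             if graph[i][j] != INF or graph[j][i] != INF:
--                 count += 1
--         if count == n:
--             answer += 1
--
--     return answer
-- ===== SOURCE B (Python) =====
-- def solution(n, results):
--     # B: record the matches in a boolean adjacency matrix over the node ids, derive
--     # adjacency lists for the nodes 1..n, then frontier BFS forward and backward from
--     # each node instead of Floyd-Warshall.
--     mat = [[False] * (n + 1) for _ in range(n + 1)]
--     for a, b in results:
--         mat[a][b] = True
--     adj = [[v for v in range(1, n + 1) if mat[u][v]] for u in range(n + 1)]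
--     radj = [[u for u in range(1, n + 1) if mat[u][v]] for v in range(n + 1)]
--
--     def reach(start, g):
--         seen = {start}
--         frontier = [start]
--         for _ in range(n):
--             nxt = []
--             for u in frontier:
--                 for v in g[u]:
--                     if v not in seen:
--                         seen.add(v)
--                         nxt.append(v)
--             frontier = nxt
--         return seen
--
--     answer = 0
--     for i in range(1, n + 1):
--         if len(reach(i, adj) | reach(i, radj)) == n:
--             answer += 1
--     return answer
-- ===== Notes on version B (the rewrite author's own statement) =====
-- stated objective: faster
-- what changed: Replaces A's O(n^3) Floyd-Warshall sentinel-distance computation by adjacency lists derived from a boolean match matrix with a frontier BFS forward and backward from each node.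
import Mathlib
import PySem

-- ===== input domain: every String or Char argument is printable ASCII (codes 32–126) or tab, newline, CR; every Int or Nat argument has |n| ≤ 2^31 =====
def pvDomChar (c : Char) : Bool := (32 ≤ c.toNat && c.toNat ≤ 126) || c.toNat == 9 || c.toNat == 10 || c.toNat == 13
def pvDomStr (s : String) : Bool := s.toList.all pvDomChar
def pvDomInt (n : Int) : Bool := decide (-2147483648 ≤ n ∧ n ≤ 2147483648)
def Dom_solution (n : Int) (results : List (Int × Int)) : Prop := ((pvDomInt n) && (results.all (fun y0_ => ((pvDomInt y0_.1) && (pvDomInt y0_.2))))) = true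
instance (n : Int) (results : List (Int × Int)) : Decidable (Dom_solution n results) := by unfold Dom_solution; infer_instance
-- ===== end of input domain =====

-- B replaces A's O(n^3) Floyd-Warshall sentinel-distance matrix by adjacency lists over the
-- nodes 1..n with a frontier BFS forward and backward from each node.



-- ===== PORT A =====
-- graph is ported as the list-of-lists Python builds; pvIdx is Python's index normalisation
-- (negative indices count from the end), pvMget/pvMset are row[i][j] reads/writes, exact for
-- every index Python accepts (out-of-range indices raise in Python and lie outside Pre_).
def pvIdx (len : Nat) (i : Int) : Int := if i < 0 then i + len else i

def pvMget {α : Type} (d : α) (g : List (List α)) (i j : Int) : α :=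
  let row := (g[(pvIdx g.length i).toNat]?).getD []
  (row[(pvIdx row.length j).toNat]?).getD d

def pvMset {α : Type} (g : List (List α)) (i j : Int) (v : α) : List (List α) :=
  let ii := (pvIdx g.length i).toNat
  let row := (g[ii]?).getD []
  g.set ii (row.set (pvIdx row.length j).toNat v)

def solution (n : Int) (results : List (Int × Int)) : Int :=
  let INF : Int := 1000000000
  let g0 : List (List Int) := List.replicate (n+1).toNat (List.replicate (n+1).toNat INF)
  let g1 := results.foldl (fun g p => pvMset g p.1 p.2 1) g0
  let rng := PySem.List.pyRange 1 (n+1)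
  let g2 := rng.foldl (fun g a => rng.foldl (fun g b => if a = b then pvMset g a b 0 else g) g) g1
  let g3 := rng.foldl (fun g k => rng.foldl (fun g a =>
      rng.foldl (fun g b => pvMset g a b (min (pvMget INF g a k + pvMget INF g k b) (pvMget INF g a b))) g) g) g2
  rng.foldl (fun answer i =>
    let count := rng.foldl (fun c j =>
      if pvMget INF g3 i j ≠ INF ∨ pvMget INF g3 j i ≠ INF then c + 1 else c) (0 : Int)
    if count = n then answer + 1 else answer) 0

-- ===== PORT B =====
-- B records the matches in a boolean (n+1)×(n+1) matrix (same Python list indexing as A's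
-- graph, via pvMset/pvMget), derives adjacency lists over the nodes 1..n, and runs a frontier
-- BFS forward and backward from each node. pvRow is Python's g[u] read (exact for the indices
-- B actually uses).
def pvRow (g : List (List Int)) (u : Int) : List Int :=
  (g[(pvIdx g.length u).toNat]?).getD []

def pvMat (n : Int) (results : List (Int × Int)) : List (List Bool) :=
  results.foldl (fun m p => pvMset m p.1 p.2 true)
    (List.replicate (n+1).toNat (List.replicate (n+1).toNat false))

def pvAdj (n : Int) (results : List (Int × Int)) : List (List Int) :=
  (PySem.List.pyRange 0 (n+1)).map (fun u =>
    (PySem.List.pyRange 1 (n+1)).filter (fun v => pvMget false (pvMat n results) u v))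

def pvRadj (n : Int) (results : List (Int × Int)) : List (List Int) :=
  (PySem.List.pyRange 0 (n+1)).map (fun v =>
    (PySem.List.pyRange 1 (n+1)).filter (fun u => pvMget false (pvMat n results) u v))

-- one BFS from start over the adjacency lists g; n rounds of frontier expansion
def pvReach (n : Int) (g : List (List Int)) (start : Int) : PySem.Set Int :=
  ((PySem.List.pyRange 0 n).foldl (fun (st : PySem.Set Int × List Int) _ =>
      st.2.foldl (fun (q : PySem.Set Int × List Int) u =>
          (pvRow g u).foldl (fun (q : PySem.Set Int × List Int) v =>
              if q.1.contains v then q else (PySem.Set.add q.1 v, q.2 ++ [v])) q)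
        (st.1, []))
    (PySem.Set.ofList [start], [start])).1

def solution_alt (n : Int) (results : List (Int × Int)) : Int :=
  (PySem.List.pyRange 1 (n+1)).foldl (fun answer i =>
      if PySem.Set.len (PySem.Set.union (pvReach n (pvAdj n results) i)
          (pvReach n (pvRadj n results) i)) = n
      then answer + 1 else answer) 0

-- ===== PRECONDITION & SPEC =====
-- the distinct node labels mentioned by the edge list
def pvEpts (results : List (Int × Int)) : Finset Int :=
  (results.map Prod.fst ++ results.map Prod.snd).toFinset

-- Pre_ keeps the inputs on which Python A returns and its sentinel arithmetic is sound: it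
-- excludes (a) inputs where A raises IndexError — some result endpoint is not a valid index of
-- the (n+1)-row tables both programs build (valid indices are -(n+1)..n, negative ones counting
-- from the end as in Python) — and (b) edge lists naming at least 5*10^8 distinct nodes, the
-- only inputs where a real hop count can reach A's 10^9 sentinel so that its sentinel test can
-- misreport reachability; n itself is unrestricted.
def Pre_solution (n : Int) (results : List (Int × Int)) : Prop :=
  (∀ p ∈ results,
      (0 ≤ n) ∧ -(n+1) ≤ p.1 ∧ p.1 ≤ n ∧ -(n+1) ≤ p.2 ∧ p.2 ≤ n) ∧
  ((pvEpts results).card : Int) ≤ 499999999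
instance (n : Int) (results : List (Int × Int)) : Decidable (Pre_solution n results) := by
  unfold Pre_solution; infer_instance
def pvWitness_solution : Int × (List (Int × Int)) := (2, [(1, 2)])

def Spec_solution (n : Int) (results : List (Int × Int)) (out : Int) : Prop := out = solution_alt n results
instance (n : Int) (results : List (Int × Int)) (out : Int) : Decidable (Spec_solution n results out) := by unfold Spec_solution; infer_instance

-- ===== CLAIM (what is proved, stated in full; the proofs are below) =====
def Claim_equal_solution : Prop := ∀ (n : Int) (results : List (Int × Int)), Dom_solution n results → Pre_solution n results → Spec_solution n results (solution n results)

-- ===== LEMMAS AND PROOFS =====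

-- ---------- walks ----------

-- the effective edge relation: a recorded match between nodes 1..n, endpoints taken the way
-- Python list indexing takes them (pvW is the value a valid index addresses)
def pvW (n i : Int) : Int := if i < 0 then i + (n + 1) else i

def EdgW (n : Int) (results : List (Int × Int)) (u v : Int) : Prop :=
  (∃ p ∈ results, pvW n p.1 = u ∧ pvW n p.2 = v) ∧ 1 ≤ u ∧ u ≤ n ∧ 1 ≤ v ∧ v ≤ n

def IsWalkP (E : Int → Int → Prop) (a b : Int) (w : List Int) : Prop :=
  List.IsChain E w ∧ w.head? = some a ∧ w.getLast? = some b

def InterL (w : List Int) : List Int := w.tail.dropLast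

-- walk whose interior vertices all lie in 1..k
def VW (E : Int → Int → Prop) (k a b : Int) (w : List Int) : Prop :=
  IsWalkP E a b w ∧ ∀ v ∈ InterL w, 1 ≤ v ∧ v ≤ k

def HasW (E : Int → Int → Prop) (k a b : Int) (m : ℕ) : Prop :=
  ∃ w, VW E k a b w ∧ w.length = m + 1

def HasAny (E : Int → Int → Prop) (a b : Int) : Prop := ∃ w, IsWalkP E a b w

def Rle (E : Int → Int → Prop) (t : ℕ) (a v : Int) : Prop :=
  ∃ w, IsWalkP E a v w ∧ w.length ≤ t + 1

def Good (E : Int → Int → Prop) (k a b : Int) (c : Int) : Prop :=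
  (c = 1000000000 ∧ ∀ m, ¬ HasW E k a b m) ∨
  (∃ m : ℕ, HasW E k a b m ∧ c = (m : Int) ∧ ∀ m', HasW E k a b m' → m ≤ m')

def InvFW (E : Int → Int → Prop) (n k : Int) (g : Int → Int → Int) : Prop :=
  ∀ a b, 1 ≤ a → a ≤ n → 1 ≤ b → b ≤ n → Good E k a b (g a b)

theorem interL_append (p t : List Int) (hp : p ≠ []) (ht : t ≠ []) :
    InterL (p ++ t) = p.tail ++ t.dropLast := by
  simp [InterL, hp, ht]

theorem dropLast_cons_ne {x : Int} {r : List Int} (h : r ≠ []) :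
    (x :: r).dropLast = x :: r.dropLast := by
  rw [show x :: r = [x] ++ r from rfl, List.dropLast_append]; simp [h]

theorem mem_tail_cases {l : List Int} {v : Int} (h : v ∈ l.tail) :
    v ∈ InterL l ∨ l.getLast? = some v := by
  rcases l with _ | ⟨x, t⟩
  · simp at h
  · simp only [List.tail_cons] at h
    rcases eq_or_ne t [] with rfl | ht
    · simp at h
    · rw [← List.dropLast_append_getLast ht] at h
      rcases List.mem_append.1 h with h' | h'
      · left; simpa [InterL] using h'
      · simp at h'
        right
        rw [List.getLast?_cons, List.getLast?_eq_some_getLast ht]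
        simp [h']

theorem splice {E : Int → Int → Prop} {k a b x : Int} {p q r : List Int}
    (h : VW E k a b (p ++ x :: (q ++ x :: r))) : VW E k a b (p ++ x :: r) := by
  obtain ⟨⟨hc, hh, hl⟩, hint⟩ := h
  have hassoc : p ++ x :: (q ++ x :: r) = (p ++ x :: q) ++ (x :: r) := by simp
  rw [hassoc] at hc hl
  refine ⟨⟨?_, ?_, ?_⟩, ?_⟩
  · rcases List.isChain_append.1 hc with ⟨hcl, hcr, _⟩
    rcases List.isChain_append.1 (show List.IsChain E (p ++ (x :: q)) from hcl) with ⟨hcp, _, hlink1⟩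
    exact List.IsChain.append hcp hcr (by
      intro u hu y hy
      simp at hy; subst hy
      exact hlink1 u hu x (by simp))
  · rw [List.head?_append] at hh ⊢
    rcases p with _ | ⟨p0, pt⟩ <;> simpa using hh
  · rw [List.getLast?_append] at hl
    rw [List.getLast?_append]
    simpa [List.getLast?_cons] using hl
  · intro v hv
    apply hint
    rcases eq_or_ne p [] with rfl | hp
    · simp only [List.nil_append] at hv ⊢
      simp only [InterL, List.tail_cons] at hv ⊢
      rcases eq_or_ne r [] with rfl | hr
      · simp at hv
      · rw [List.dropLast_append]
        rw [if_neg (by simp : ¬ (x :: r).isEmpty = true), dropLast_cons_ne hr]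
        exact List.mem_append.2 (Or.inr (List.mem_cons.2 (Or.inr hv)))
    · have h1 : InterL (p ++ x :: r) = p.tail ++ (x :: r).dropLast :=
        interL_append p (x :: r) hp (by simp)
      have h2 : InterL (p ++ x :: (q ++ x :: r))
          = p.tail ++ x :: (q ++ (x :: r).dropLast) := by
        rw [interL_append p (x :: (q ++ x :: r)) hp (by simp)]
        rw [dropLast_cons_ne (by simp : q ++ x :: r ≠ [])]
        rw [List.dropLast_append, if_neg (by simp : ¬ (x :: r).isEmpty = true)]
      rw [h1] at hv
      rw [h2]
      rcases List.mem_append.1 hv with h' | h'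
      · exact List.mem_append.2 (Or.inl h')
      · rcases eq_or_ne r [] with rfl | hr
        · simp at h'
        · rw [dropLast_cons_ne hr] at h'
          refine List.mem_append.2 (Or.inr ?_)
          rcases List.mem_cons.1 h' with rfl | h''
          · exact List.mem_cons_self
          · exact List.mem_cons.2 (Or.inr (List.mem_append.2 (Or.inr (by
              rw [dropLast_cons_ne hr]; exact List.mem_cons.2 (Or.inr h'')))))

theorem exists_dup_split {w : List Int} (h : ¬ w.Nodup) :
    ∃ p x q r, w = p ++ x :: (q ++ x :: r) := by
  induction w with
  | nil => simp at h
  | cons y t ih =>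
    by_cases hy : y ∈ t
    · obtain ⟨q, r, rfl⟩ := List.mem_iff_append.1 hy
      exact ⟨[], y, q, r, rfl⟩
    · have : ¬ t.Nodup := by
        intro hnd; exact h (List.nodup_cons.2 ⟨hy, hnd⟩)
      obtain ⟨p, x, q, r, rfl⟩ := ih this
      exact ⟨y :: p, x, q, r, rfl⟩

theorem shortenAux {E : Int → Int → Prop} {k a b : Int} :
    ∀ (L : ℕ) (w : List Int), w.length ≤ L → VW E k a b w →
      ∃ w', VW E k a b w' ∧ w'.Nodup ∧ w'.length ≤ w.length := by
  intro L
  induction L with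
  | zero =>
    intro w hL h
    exact ⟨w, h, by rcases w with _|_ <;> simp_all, le_rfl⟩
  | succ L ih =>
    intro w hL h
    by_cases hnd : w.Nodup
    · exact ⟨w, h, hnd, le_rfl⟩
    · obtain ⟨p, x, q, r, rfl⟩ := exists_dup_split hnd
      have h' := splice h
      have hlt : (p ++ x :: r).length < (p ++ x :: (q ++ x :: r)).length := by
        simp only [List.length_append, List.length_cons]; omega
      obtain ⟨w', hw', hnd', hle⟩ := ih (p ++ x :: r) (by simp at hL hlt ⊢; omega) h'
      exact ⟨w', hw', hnd', le_trans hle (le_of_lt hlt)⟩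

theorem shorten {E : Int → Int → Prop} {k a b : Int} {w : List Int} (h : VW E k a b w) :
    ∃ w', VW E k a b w' ∧ w'.Nodup ∧ w'.length ≤ w.length :=
  shortenAux w.length w le_rfl h

theorem nodup_len_le {w : List Int} {N : Int} (hN : 0 ≤ N) (hnd : w.Nodup)
    (hmem : ∀ v ∈ w, 1 ≤ v ∧ v ≤ N) : (w.length : Int) ≤ N := by
  have hsub : w.toFinset ⊆ Finset.Icc 1 N := by
    intro v hv
    rcases hmem v (List.mem_toFinset.1 hv) with ⟨h1, h2⟩
    exact Finset.mem_Icc.2 ⟨h1, h2⟩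
  have hcard := Finset.card_le_card hsub
  rw [List.toFinset_card_of_nodup hnd, Int.card_Icc] at hcard
  have : (w.length : Int) ≤ (N + 1 - 1).toNat := by exact_mod_cast hcard
  omega

theorem mem_chain_head_or_edge {E : Int → Int → Prop} {w : List Int} {a v : Int}
    (hc : List.IsChain E w) (ha : w.head? = some a) (hv : v ∈ w) :
    v = a ∨ ∃ u, E u v := by
  induction w generalizing a with
  | nil => simp at hv
  | cons y t ih =>
    have hya : y = a := by simpa using ha
    rcases List.mem_cons.1 hv with h | hvt
    · exact Or.inl (h.trans hya)
    · rcases t with _ | ⟨z, t'⟩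
      · simp at hvt
      · have hc' := List.isChain_cons_cons.1 hc
        rcases ih hc'.2 rfl hvt with rfl | h
        · exact Or.inr ⟨y, hc'.1⟩
        · exact Or.inr h

-- all vertices of a VW-walk lie in 1..N when its endpoints do and edges point into 1..N
theorem walk_mem_bounds {E : Int → Int → Prop} {N k a b : Int} {w : List Int}
    (hE : ∀ u v, E u v → 1 ≤ v ∧ v ≤ N) (hk : k ≤ N)
    (ha : 1 ≤ a ∧ a ≤ N) (h : VW E k a b w) : ∀ v ∈ w, 1 ≤ v ∧ v ≤ N := by
  intro v hv
  rcases mem_chain_head_or_edge h.1.1 h.1.2.1 hv with rfl | ⟨u, hu⟩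
  · exact ha
  · exact hE u v hu

-- a minimal via-walk length is bounded by the number of distinct edge targets
theorem hasW_min_bound {E : Int → Int → Prop} {S : Finset Int} {k a b : Int} {m : ℕ}
    (hE : ∀ u v, E u v → v ∈ S)
    (hm : HasW E k a b m) (hmin : ∀ m', HasW E k a b m' → m ≤ m') :
    (m : Int) ≤ (S.card : Int) := by
  obtain ⟨w, hw, hlen⟩ := hm
  obtain ⟨w', hw', hnd', hle'⟩ := shorten hw
  have hne : w' ≠ [] := by
    intro hnil; rw [hnil] at hw'
    rcases hw' with ⟨⟨_, hh, _⟩, _⟩; simp at hh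
  have hsub : w'.toFinset ⊆ insert a S := by
    intro v hv
    rcases mem_chain_head_or_edge hw'.1.1 hw'.1.2.1 (List.mem_toFinset.1 hv) with rfl | ⟨u, hu⟩
    · exact Finset.mem_insert_self _ _
    · exact Finset.mem_insert_of_mem (hE u v hu)
  have hcard := Finset.card_le_card hsub
  rw [List.toFinset_card_of_nodup hnd'] at hcard
  have hlen' : w'.length ≤ S.card + 1 := le_trans hcard (Finset.card_insert_le a S)
  have h1 : 1 ≤ w'.length := List.length_pos_iff.2 hne
  have hm' : HasW E k a b (w'.length - 1) := ⟨w', hw', by omega⟩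
  have := hmin _ hm'
  have hnat : m ≤ S.card := by omega
  exact_mod_cast hnat

theorem good_nonneg {E : Int → Int → Prop} {k a b c : Int} (h : Good E k a b c) : 0 ≤ c := by
  rcases h with ⟨rfl, _⟩ | ⟨m, _, rfl, _⟩
  · norm_num
  · positivity

theorem hasW_mono {E : Int → Int → Prop} {k k' a b : Int} {m : ℕ} (hk : k' ≤ k)
    (h : HasW E k' a b m) : HasW E k a b m := by
  obtain ⟨w, ⟨hw, hint⟩, hlen⟩ := h
  exact ⟨w, ⟨hw, fun v hv => ⟨(hint v hv).1, le_trans (hint v hv).2 hk⟩⟩, hlen⟩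

theorem hasW_concat {E : Int → Int → Prop} {k a b : Int} {m1 m2 : ℕ}
    (hk : 1 ≤ k) (h1 : HasW E (k-1) a k m1) (h2 : HasW E (k-1) k b m2) :
    HasW E k a b (m1 + m2) := by
  obtain ⟨w1, ⟨⟨hc1, hh1, hl1⟩, hint1⟩, hlen1⟩ := h1
  obtain ⟨w2, ⟨⟨hc2, hh2, hl2⟩, hint2⟩, hlen2⟩ := h2
  rcases w2 with _ | ⟨x, t⟩
  · simp at hh2
  · have hx : x = k := by simpa using hh2
    subst hx
    have hw1ne : w1 ≠ [] := by intro hnil; rw [hnil] at hh1; simp at hh1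
    refine ⟨w1 ++ t, ⟨⟨?_, ?_, ?_⟩, ?_⟩, ?_⟩
    · refine List.IsChain.append hc1 (List.isChain_cons.1 hc2).2 ?_
      intro u hu y hy
      rw [hl1] at hu; simp at hu; subst hu
      exact (List.isChain_cons.1 hc2).1 y hy
    · rw [List.head?_append]
      rcases w1 with _ | ⟨w0, wt⟩
      · simp at hh1
      · simpa using hh1
    · rcases eq_or_ne t [] with rfl | ht
      · have : b = x := by simpa using hl2.symm
        subst this
        simpa using hl1
      · rw [List.getLast?_append]
        rw [List.getLast?_cons, List.getLast?_eq_some_getLast ht] at hl2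
        simp at hl2
        rw [List.getLast?_eq_some_getLast ht]
        simp [hl2]
    · intro v hv
      rcases eq_or_ne t [] with rfl | ht
      · simp only [List.append_nil] at hv
        rcases hint1 v hv with ⟨hv1, hv2⟩
        exact ⟨hv1, by omega⟩
      · rw [interL_append w1 t hw1ne ht] at hv
        rcases List.mem_append.1 hv with h' | h'
        · rcases mem_tail_cases (l := w1) (by exact h') with h'' | h''
          · rcases hint1 v h'' with ⟨hv1, hv2⟩
            exact ⟨hv1, by omega⟩
          · rw [hl1] at h''
            simp at h''
            subst h''
            exact ⟨hk, le_rfl⟩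
        · have : v ∈ InterL (x :: t) := by simpa [InterL] using h'
          rcases hint2 v this with ⟨hv1, hv2⟩
          exact ⟨hv1, by omega⟩
    · have h1' : w1.length = m1 + 1 := hlen1
      have h2' : t.length = m2 := by simpa using hlen2
      simp only [List.length_append, h1', h2']
      omega

theorem first_split {x : Int} {l : List Int} (h : x ∈ l) :
    ∃ l1 l2, l = l1 ++ x :: l2 ∧ x ∉ l1 := by
  induction l with
  | nil => simp at h
  | cons y t ih =>
    by_cases hxy : x = y
    · exact ⟨[], t, by simp [hxy], by simp⟩
    · rcases List.mem_cons.1 h with h' | h'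
      · exact absurd h' hxy
      · obtain ⟨l1, l2, rfl, hnx⟩ := ih h'
        exact ⟨y :: l1, l2, rfl, by simp [hxy, hnx]⟩

theorem hasW_split {E : Int → Int → Prop} {k a b : Int} :
    ∀ m, HasW E k a b m → HasW E (k-1) a b m ∨
      ∃ m1 m2, m1 + m2 ≤ m ∧ HasW E (k-1) a k m1 ∧ HasW E (k-1) k b m2 := by
  intro m
  induction m using Nat.strong_induction_on generalizing a with
  | _ m ih =>
    intro h
    obtain ⟨w, ⟨⟨hc, hh, hl⟩, hint⟩, hlen⟩ := h
    by_cases hkin : k ∈ InterL w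
    · rcases w with _ | ⟨c, t⟩
      · simp at hh
      have hca : c = a := by simpa using hh
      subst hca
      have hkt : k ∈ t := (List.dropLast_sublist t).subset (by simpa [InterL] using hkin)
      obtain ⟨t1, t2, rfl, hknt1⟩ := first_split hkt
      have ht2 : t2 ≠ [] := by
        rintro rfl
        apply hknt1
        have : InterL (c :: (t1 ++ k :: ([] : List Int))) = t1 := by
          simp [InterL, List.dropLast_concat]
        rwa [this] at hkin
      have hassoc : c :: (t1 ++ k :: t2) = (c :: t1) ++ (k :: t2) := by simp
      rw [hassoc] at hc hl
      rcases List.isChain_append.1 hc with ⟨hcl, hcr, hlink⟩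
      have hInterw : InterL (c :: (t1 ++ k :: t2)) = t1 ++ k :: t2.dropLast := by
        simp only [InterL, List.tail_cons]
        rw [List.dropLast_append, if_neg (by simp : ¬ (k :: t2).isEmpty = true),
          dropLast_cons_ne ht2]
      have hw1 : HasW E (k-1) c k (t1.length + 1) := by
        refine ⟨(c :: t1) ++ [k], ⟨⟨?_, ?_, ?_⟩, ?_⟩, by simp⟩
        · refine List.IsChain.append hcl (by simp) ?_
          intro u hu y hy
          simp at hy; subst hy
          exact hlink u hu k (by simp)
        · simp
        · exact List.getLast?_concat
        · intro v hv
          have hveq : v ∈ t1 := by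
            have : InterL ((c :: t1) ++ [k]) = t1 := by
              rw [interL_append (c :: t1) [k] (by simp) (by simp)]
              simp
            rwa [this] at hv
          have hvw : v ∈ InterL (c :: (t1 ++ k :: t2)) := by
            rw [hInterw]; exact List.mem_append.2 (Or.inl hveq)
          rcases hint v hvw with ⟨h1, h2⟩
          have : v ≠ k := fun hvk => hknt1 (hvk ▸ hveq)
          constructor <;> omega
      have hw2 : HasW E k k b t2.length := by
        refine ⟨k :: t2, ⟨⟨hcr, by simp, ?_⟩, ?_⟩, by simp⟩
        · rw [List.getLast?_append] at hl
          rcases ho : (k :: t2).getLast? with _ | z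
          · simp at ho
          · rw [ho] at hl; simpa using hl
        · intro v hv
          have : v ∈ InterL (c :: (t1 ++ k :: t2)) := by
            rw [hInterw]
            refine List.mem_append.2 (Or.inr (List.mem_cons.2 (Or.inr ?_)))
            simpa [InterL] using hv
          exact hint v this
      have hmval : t1.length + 1 + t2.length = m := by
        have : (c :: (t1 ++ k :: t2)).length = m + 1 := hlen
        simp at this; omega
      have hlt : t2.length < m := by omega
      rcases ih t2.length hlt (a := k) hw2 with h' | ⟨u1, u2, hle, hu1, hu2⟩
      · exact Or.inr ⟨t1.length + 1, t2.length, by omega, hw1, h'⟩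
      · exact Or.inr ⟨t1.length + 1, u2, by omega, hw1, hu2⟩
    · left
      refine ⟨w, ⟨⟨hc, hh, hl⟩, ?_⟩, hlen⟩
      intro v hv
      rcases hint v hv with ⟨h1, h2⟩
      have : v ≠ k := fun hvk => hkin (hvk ▸ hv)
      constructor <;> omega

-- the Floyd-Warshall cell update preserves Good, one k-round; S bounds the edge targets
theorem good_step {E : Int → Int → Prop} {S : Finset Int} {k a b : Int} {x y z : Int}
    (hE : ∀ u v, E u v → v ∈ S) (hS : (S.card : Int) ≤ 499999999)
    (hk : 1 ≤ k)
    (hx : Good E (k-1) a k x) (hy : Good E (k-1) k b y) (hz : Good E (k-1) a b z) :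
    Good E k a b (min (x + y) z) := by
  have hxn := good_nonneg hx
  have hyn := good_nonneg hy
  rcases hx with ⟨hxI, hxno⟩ | ⟨m1, hm1, hxv, hmin1⟩ <;>
    rcases hy with ⟨hyI, hyno⟩ | ⟨m2, hm2, hyv, hmin2⟩ <;>
    rcases hz with ⟨hzI, hzno⟩ | ⟨m0, hm0, hzv, hmin0⟩
  -- x INF, y INF, z INF
  · subst hxI hyI hzI
    refine Or.inl ⟨by norm_num, ?_⟩
    intro m hm
    rcases hasW_split m hm with h' | ⟨u1, u2, _, hu1, hu2⟩
    · exact hzno m h'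
    · exact hxno u1 hu1
  -- x INF, y INF, z finite
  · subst hxI hyI hzv
    have hb0 : (m0 : Int) ≤ (S.card : Int) := hasW_min_bound hE hm0 hmin0
    have hmv : min ((1000000000 : Int) + 1000000000) (m0 : Int) = (m0 : Int) := by omega
    rw [hmv]
    refine Or.inr ⟨m0, hasW_mono (by omega) hm0, rfl, ?_⟩
    intro m' hm'
    rcases hasW_split m' hm' with h' | ⟨u1, u2, _, hu1, hu2⟩
    · exact hmin0 m' h'
    · exact absurd hu1 (hxno u1)
  -- x INF, y finite, z INF
  · subst hxI hyv hzI
    have hmv : min ((1000000000 : Int) + (m2 : Int)) 1000000000 = 1000000000 := by omega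
    rw [hmv]
    refine Or.inl ⟨rfl, ?_⟩
    intro m hm
    rcases hasW_split m hm with h' | ⟨u1, u2, _, hu1, hu2⟩
    · exact hzno m h'
    · exact hxno u1 hu1
  -- x INF, y finite, z finite
  · subst hxI hyv hzv
    have hb0 : (m0 : Int) ≤ (S.card : Int) := hasW_min_bound hE hm0 hmin0
    have hmv : min ((1000000000 : Int) + (m2 : Int)) (m0 : Int) = (m0 : Int) := by omega
    rw [hmv]
    refine Or.inr ⟨m0, hasW_mono (by omega) hm0, rfl, ?_⟩
    intro m' hm'
    rcases hasW_split m' hm' with h' | ⟨u1, u2, _, hu1, hu2⟩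
    · exact hmin0 m' h'
    · exact absurd hu1 (hxno u1)
  -- x finite, y INF, z INF
  · subst hxv hyI hzI
    have hmv : min ((m1 : Int) + 1000000000) 1000000000 = 1000000000 := by omega
    rw [hmv]
    refine Or.inl ⟨rfl, ?_⟩
    intro m hm
    rcases hasW_split m hm with h' | ⟨u1, u2, _, hu1, hu2⟩
    · exact hzno m h'
    · exact hyno u2 hu2
  -- x finite, y INF, z finite
  · subst hxv hyI hzv
    have hb0 : (m0 : Int) ≤ (S.card : Int) := hasW_min_bound hE hm0 hmin0
    have hmv : min ((m1 : Int) + 1000000000) (m0 : Int) = (m0 : Int) := by omega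
    rw [hmv]
    refine Or.inr ⟨m0, hasW_mono (by omega) hm0, rfl, ?_⟩
    intro m' hm'
    rcases hasW_split m' hm' with h' | ⟨u1, u2, _, hu1, hu2⟩
    · exact hmin0 m' h'
    · exact absurd hu2 (hyno u2)
  -- x finite, y finite, z INF
  · subst hxv hyv hzI
    have hb1 : (m1 : Int) ≤ (S.card : Int) := hasW_min_bound hE hm1 hmin1
    have hb2 : (m2 : Int) ≤ (S.card : Int) := hasW_min_bound hE hm2 hmin2
    have hmv : min ((m1 : Int) + (m2 : Int)) 1000000000 = ((m1 + m2 : ℕ) : Int) := by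
      push_cast; omega
    rw [hmv]
    refine Or.inr ⟨m1 + m2, hasW_concat hk hm1 hm2, rfl, ?_⟩
    intro m' hm'
    rcases hasW_split m' hm' with h' | ⟨u1, u2, hle, hu1, hu2⟩
    · exact absurd h' (hzno m')
    · have := hmin1 u1 hu1
      have := hmin2 u2 hu2
      omega
  -- all finite
  · subst hxv hyv hzv
    have hmv : min ((m1 : Int) + (m2 : Int)) (m0 : Int) = ((min (m1 + m2) m0 : ℕ) : Int) := by
      push_cast; omega
    rw [hmv]
    refine Or.inr ⟨min (m1 + m2) m0, ?_, rfl, ?_⟩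
    · rcases le_total (m1 + m2) m0 with hle | hle
      · rw [min_eq_left hle]
        exact hasW_concat hk hm1 hm2
      · rw [min_eq_right hle]
        exact hasW_mono (by omega) hm0
    · intro m' hm'
      rcases hasW_split m' hm' with h' | ⟨u1, u2, hle, hu1, hu2⟩
      · exact le_trans (min_le_right _ _) (hmin0 m' h')
      · have := hmin1 u1 hu1
        have := hmin2 u2 hu2
        have : m1 + m2 ≤ m' := by omega
        exact le_trans (min_le_left _ _) this


-- ---------- matrix/function simulation ----------

-- the abstract Floyd-Warshall/matrix state as a finitely-updated function
def pvUpd {α : Type} (g : Int → Int → α) (a b : Int) (v : α) : Int → Int → α :=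
  fun x y => if x = a ∧ y = b then v else g x y

-- the function model of A's three phases and of B's matrix (proof-side only)
def pvF1 (n : Int) (results : List (Int × Int)) : Int → Int → Int :=
  results.foldl (fun f p =>
    if 1 ≤ pvW n p.1 ∧ 1 ≤ pvW n p.2 then pvUpd f (pvW n p.1) (pvW n p.2) 1 else f)
    (fun _ _ => 1000000000)

def pvF2 (n : Int) (results : List (Int × Int)) : Int → Int → Int :=
  (PySem.List.pyRange 1 (n+1)).foldl (fun f a =>
    (PySem.List.pyRange 1 (n+1)).foldl (fun f b => if a = b then pvUpd f a b 0 else f) f)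
    (pvF1 n results)

def pvF3 (n : Int) (results : List (Int × Int)) : Int → Int → Int :=
  (PySem.List.pyRange 1 (n+1)).foldl (fun f k =>
    (PySem.List.pyRange 1 (n+1)).foldl (fun f a =>
      (PySem.List.pyRange 1 (n+1)).foldl (fun f b =>
        pvUpd f a b (min (f a k + f k b) (f a b))) f) f)
    (pvF2 n results)

def pvFB (n : Int) (results : List (Int × Int)) : Int → Int → Bool :=
  results.foldl (fun f p =>
    if 1 ≤ pvW n p.1 ∧ 1 ≤ pvW n p.2 then pvUpd f (pvW n p.1) (pvW n p.2) true else f)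
    (fun _ _ => false)

-- correspondence between a list-of-lists matrix and a function model on 1..n
def MRel {α : Type} (d : α) (n : Int) (g : List (List α)) (f : Int → Int → α) : Prop :=
  g.length = (n+1).toNat ∧ (∀ row ∈ g, row.length = (n+1).toNat) ∧
  ∀ x y, 1 ≤ x → x ≤ n → 1 ≤ y → y ≤ n → pvMget d g x y = f x y

theorem foldl_rel {α β γ : Type} (R : α → β → Prop) (s : α → γ → α) (t : β → γ → β) :
    ∀ (l : List γ) (a : α) (b : β),
      (∀ a' b' c, c ∈ l → R a' b' → R (s a' c) (t b' c)) → R a b →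
      R (l.foldl s a) (l.foldl t b) := by
  intro l
  induction l with
  | nil => intro a b _ h; exact h
  | cons c cs ih =>
    intro a b hstep h
    exact ih _ _ (fun a' b' d hd => hstep a' b' d (List.mem_cons.2 (Or.inr hd)))
      (hstep a b c List.mem_cons_self h)

theorem pvIdx_nonneg (L : Nat) {x : Int} (h : 0 ≤ x) : pvIdx L x = x := by
  simp [pvIdx]; omega

theorem pvW_nonneg {n i : Int} (hn : 0 ≤ n) (h1 : -(n+1) ≤ i) : 0 ≤ pvW n i := by
  unfold pvW; split_ifs <;> omega

theorem pvW_le {n i : Int} (h2 : i ≤ n) : pvW n i ≤ n := by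
  unfold pvW; split_ifs <;> omega

theorem mrel_init {α : Type} (d : α) (n : Int) :
    MRel d n (List.replicate (n+1).toNat (List.replicate (n+1).toNat d))
      (fun _ _ => d) := by
  refine ⟨List.length_replicate, ?_, ?_⟩
  · intro row hrow
    rw [List.eq_of_mem_replicate hrow, List.length_replicate]
  · intro x y hx1 hx2 hy1 hy2
    have hxlt : x.toNat < (n+1).toNat := by omega
    have hylt : y.toNat < (n+1).toNat := by omega
    simp only [pvMget, pvIdx, List.length_replicate]
    rw [if_neg (by omega : ¬ x < 0), List.getElem?_replicate, if_pos hxlt]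
    simp only [Option.getD_some, List.length_replicate]
    rw [if_neg (by omega : ¬ y < 0), List.getElem?_replicate, if_pos hylt]
    rfl

theorem mset_shape {α : Type} {n : Int} {g : List (List α)} (i j : Int) (v : α)
    (hlen : g.length = (n+1).toNat) (hrow : ∀ row ∈ g, row.length = (n+1).toNat)
    (hii : (pvIdx g.length i).toNat < g.length) :
    (pvMset g i j v).length = (n+1).toNat ∧
    ∀ row ∈ pvMset g i j v, row.length = (n+1).toNat := by
  constructor
  · simp only [pvMset, List.length_set]; exact hlen
  · intro row hmem
    simp only [pvMset] at hmem
    rcases List.mem_or_eq_of_mem_set hmem with h | rfl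
    · exact hrow _ h
    · rw [List.length_set]
      rw [List.getElem?_eq_getElem hii, Option.getD_some]
      exact hrow _ (List.getElem_mem hii)

theorem mget_set_valid {α : Type} {d : α} {n i j x y : Int} {v : α} {g : List (List α)}
    (hlen : g.length = (n+1).toNat) (hrow : ∀ row ∈ g, row.length = (n+1).toNat)
    (hi1 : 1 ≤ i) (hi2 : i ≤ n) (hj1 : 1 ≤ j) (hj2 : j ≤ n)
    (hx1 : 1 ≤ x) (hx2 : x ≤ n) (hy1 : 1 ≤ y) (hy2 : y ≤ n) :
    pvMget d (pvMset g i j v) x y = if x = i ∧ y = j then v else pvMget d g x y := by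
  have hii : i.toNat < g.length := by omega
  have hxx : x.toNat < g.length := by omega
  have hrowmem : g[i.toNat] ∈ g := List.getElem_mem hii
  have hrl : (g[i.toNat]).length = (n+1).toNat := hrow _ hrowmem
  have hjj : j.toNat < (g[i.toNat]).length := by omega
  simp only [pvMset, pvMget, pvIdx, List.length_set,
    pvIdx_nonneg g.length (by omega : (0:Int) ≤ i)]
  rw [if_neg (by omega : ¬ (i:Int) < 0), if_neg (by omega : ¬ (x:Int) < 0)]
  rw [List.getElem?_eq_getElem hii, Option.getD_some]
  rw [if_neg (by omega : ¬ (j:Int) < 0)]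
  rw [List.getElem?_set]
  by_cases hxi : x = i
  · have : i.toNat = x.toNat := by omega
    rw [if_pos this, if_pos (this ▸ hii), Option.getD_some, List.length_set]
    rw [if_neg (by omega : ¬ (y:Int) < 0)]
    rw [List.getElem?_set]
    by_cases hyj : y = j
    · have hjy : j.toNat = y.toNat := by omega
      rw [if_pos hjy, if_pos (hjy ▸ hjj), Option.getD_some, if_pos ⟨hxi, hyj⟩]
    · have hjy : ¬ j.toNat = y.toNat := by omega
      rw [if_neg hjy, if_neg (by tauto : ¬ (x = i ∧ y = j))]
      rw [List.getElem?_eq_getElem hxx, Option.getD_some]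
      have hge : g[x.toNat] = g[i.toNat] := by congr 1; omega
      rw [hge, if_neg (by omega : ¬ (y:Int) < 0)]
  · have : ¬ i.toNat = x.toNat := by omega
    rw [if_neg this, if_neg (by tauto : ¬ (x = i ∧ y = j))]

theorem msetRel_in {α : Type} {d : α} {n i j : Int} {v : α} {g : List (List α)}
    {f : Int → Int → α}
    (h : MRel d n g f) (hi1 : 1 ≤ i) (hi2 : i ≤ n) (hj1 : 1 ≤ j) (hj2 : j ≤ n) :
    MRel d n (pvMset g i j v) (pvUpd f i j v) := by
  obtain ⟨hlen, hrow, hval⟩ := h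
  have hii : (pvIdx g.length i).toNat < g.length := by
    rw [pvIdx_nonneg g.length (by omega : (0:Int) ≤ i)]; omega
  obtain ⟨hl2, hr2⟩ := mset_shape i j v hlen hrow hii
  refine ⟨hl2, hr2, ?_⟩
  intro x y hx1 hx2 hy1 hy2
  rw [mget_set_valid hlen hrow hi1 hi2 hj1 hj2 hx1 hx2 hy1 hy2]
  by_cases hc : x = i ∧ y = j
  · rw [if_pos hc]; simp [pvUpd, hc]
  · rw [if_neg hc, hval x y hx1 hx2 hy1 hy2]
    simp only [pvUpd]
    rw [if_neg hc]

theorem mget_set_row_ne {α : Type} {d : α} {g : List (List α)} {ii : Nat} {r' : List α}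
    {x y : Int} (hx : x.toNat ≠ ii) (hx0 : 0 ≤ x) :
    pvMget d (g.set ii r') x y = pvMget d g x y := by
  simp only [pvMget, List.length_set]
  rw [pvIdx_nonneg _ hx0]
  rw [List.getElem?_set, if_neg (fun h => hx h.symm)]

theorem mget_set_self_col0 {α : Type} {d : α} {g : List (List α)} {ii : Nat} {v : α}
    {x y : Int} (hx : x.toNat = ii) (hii : ii < g.length) (hx0 : 0 ≤ x) (hy1 : 1 ≤ y) :
    pvMget d (g.set ii (((g[ii]?).getD []).set 0 v)) x y = pvMget d g x y := by
  simp only [pvMget, List.length_set]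
  rw [pvIdx_nonneg _ hx0]
  rw [List.getElem?_set, if_pos hx.symm, if_pos hii, Option.getD_some]
  rw [hx]
  rw [List.getElem?_eq_getElem hii, Option.getD_some]
  simp only [List.length_set]
  rw [pvIdx_nonneg _ (by omega : (0:Int) ≤ y)]
  rw [List.getElem?_set, if_neg (by omega : ¬ (0 = y.toNat))]

theorem msetRel_skip {α : Type} {d : α} {n i j : Int} {v : α} {g : List (List α)}
    {f : Int → Int → α}
    (h : MRel d n g f) (hn : 0 ≤ n)
    (hoki : i = -(n+1) ∨ i = 0 ∨ (1 ≤ i ∧ i ≤ n))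
    (hokj : j = -(n+1) ∨ j = 0 ∨ (1 ≤ j ∧ j ≤ n))
    (hnotin : ¬ (1 ≤ i ∧ i ≤ n ∧ 1 ≤ j ∧ j ≤ n)) :
    MRel d n (pvMset g i j v) f := by
  obtain ⟨hlen, hrow, hval⟩ := h
  have hlenpos : 0 < g.length := by omega
  -- the normalised row index
  have hiv : (pvIdx g.length i) = (if 1 ≤ i ∧ i ≤ n then i else 0) := by
    rcases hoki with rfl | rfl | ⟨h1, h2⟩
    · rw [if_neg (by omega : ¬ ((1:Int) ≤ -(n+1) ∧ -(n+1) ≤ n))]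
      simp only [pvIdx]
      rw [if_pos (by omega : -(n+1) < (0:Int)), hlen]
      omega
    · rw [if_neg (by omega : ¬ ((1:Int) ≤ 0 ∧ (0:Int) ≤ n))]
      exact pvIdx_nonneg g.length le_rfl
    · rw [if_pos ⟨h1, h2⟩]
      exact pvIdx_nonneg g.length (by omega)
  have hii : (pvIdx g.length i).toNat < g.length := by
    rw [hiv]; split_ifs <;> omega
  obtain ⟨hl2, hr2⟩ := mset_shape i j v hlen hrow hii
  refine ⟨hl2, hr2, ?_⟩
  intro x y hx1 hx2 hy1 hy2
  by_cases hib : 1 ≤ i ∧ i ≤ n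
  · -- row i is written, but at column 0: reads at y ≥ 1 are unaffected
    have hjz : ¬ (1 ≤ j ∧ j ≤ n) := by tauto
    have hivi : pvIdx g.length i = i := by rw [hiv, if_pos hib]
    have hii' : i.toNat < g.length := by rw [hivi] at hii; exact hii
    have hrl : ((g[i.toNat]?).getD []).length = (n+1).toNat := by
      rw [List.getElem?_eq_getElem hii', Option.getD_some]
      exact hrow _ (List.getElem_mem hii')
    have hjv : (pvIdx ((g[i.toNat]?).getD []).length j) = 0 := by
      rcases hokj with rfl | rfl | hb
      · simp only [pvIdx]
        rw [if_pos (by omega : -(n+1) < (0:Int)), hrl]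
        omega
      · exact pvIdx_nonneg _ le_rfl
      · exact absurd hb hjz
    have hms : pvMset g i j v = g.set i.toNat (((g[i.toNat]?).getD []).set 0 v) := by
      simp only [pvMset, hivi, hjv]
      rfl
    rw [hms]
    by_cases hxi : x = i
    · rw [mget_set_self_col0 (by omega) hii' (by omega) hy1]
      exact hval x y hx1 hx2 hy1 hy2
    · rw [mget_set_row_ne (by omega) (by omega)]
      exact hval x y hx1 hx2 hy1 hy2
  · -- the write lands in row 0: reads at x ≥ 1 are unaffected
    have h0 : (pvIdx g.length i).toNat = 0 := by rw [hiv, if_neg hib]; rfl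
    have hunf : pvMset g i j v
        = g.set ((pvIdx g.length i).toNat)
            (((g[(pvIdx g.length i).toNat]?).getD []).set
              ((pvIdx (((g[(pvIdx g.length i).toNat]?).getD []).length) j).toNat) v) := rfl
    rw [hunf, h0, mget_set_row_ne (by omega) (by omega)]
    exact hval x y hx1 hx2 hy1 hy2

-- writing at a valid Python index is writing at the wrapped coordinates
theorem mset_wrap {α : Type} {n i j : Int} {v : α} {g : List (List α)}
    (hlen : g.length = (n+1).toNat) (hrow : ∀ row ∈ g, row.length = (n+1).toNat)
    (hn : 0 ≤ n) (hi1 : -(n+1) ≤ i) (hi2 : i ≤ n) (hj1 : -(n+1) ≤ j) (hj2 : j ≤ n) :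
    pvMset g i j v = pvMset g (pvW n i) (pvW n j) v := by
  have h1 : pvIdx g.length i = pvW n i := by
    unfold pvIdx pvW; rw [hlen]; split_ifs <;> omega
  have h1' : pvIdx g.length (pvW n i) = pvW n i :=
    pvIdx_nonneg g.length (pvW_nonneg hn hi1)
  have hii : (pvW n i).toNat < g.length := by
    have := pvW_nonneg hn hi1
    have := pvW_le hi2
    omega
  have hrl : ((g[(pvW n i).toNat]?).getD []).length = (n+1).toNat := by
    rw [List.getElem?_eq_getElem hii, Option.getD_some]
    exact hrow _ (List.getElem_mem hii)
  have h2 : pvIdx (((g[(pvW n i).toNat]?).getD []).length) j = pvW n j := by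
    rw [show (((g[(pvW n i).toNat]?).getD []).length) = (n+1).toNat from hrl]
    unfold pvIdx pvW; split_ifs <;> omega
  have h2' : pvIdx (((g[(pvW n i).toNat]?).getD []).length) (pvW n j) = pvW n j :=
    pvIdx_nonneg _ (pvW_nonneg hn hj1)
  simp only [pvMset, h1, h1', h2, h2']

-- one matrix write tracks one function-model step, for any valid Python index pair
theorem wstep_rel {α : Type} {d : α} {n : Int} (c : α) {g : List (List α)}
    {f : Int → Int → α} {p : Int × Int}
    (h : MRel d n g f) (hn : 0 ≤ n)
    (h1 : -(n+1) ≤ p.1) (h2 : p.1 ≤ n) (h3 : -(n+1) ≤ p.2) (h4 : p.2 ≤ n) :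
    MRel d n (pvMset g p.1 p.2 c)
      (if 1 ≤ pvW n p.1 ∧ 1 ≤ pvW n p.2 then pvUpd f (pvW n p.1) (pvW n p.2) c else f) := by
  rw [mset_wrap h.1 h.2.1 hn h1 h2 h3 h4]
  by_cases hv : 1 ≤ pvW n p.1 ∧ 1 ≤ pvW n p.2
  · rw [if_pos hv]
    exact msetRel_in h hv.1 (pvW_le h2) hv.2 (pvW_le h4)
  · rw [if_neg hv]
    have hw1 : pvW n p.1 = 0 ∨ (1 ≤ pvW n p.1 ∧ pvW n p.1 ≤ n) := by
      have := pvW_nonneg hn h1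
      have := pvW_le h2
      omega
    have hw2 : pvW n p.2 = 0 ∨ (1 ≤ pvW n p.2 ∧ pvW n p.2 ≤ n) := by
      have := pvW_nonneg hn h3
      have := pvW_le h4
      omega
    refine msetRel_skip h hn ?_ ?_ ?_
    · rcases hw1 with h' | h'
      · exact Or.inr (Or.inl h')
      · exact Or.inr (Or.inr h')
    · rcases hw2 with h' | h'
      · exact Or.inr (Or.inl h')
      · exact Or.inr (Or.inr h')
    · intro hc
      exact hv ⟨hc.1, hc.2.2.1⟩

-- B's matrix tracks its function model
theorem mat_rel (n : Int) (results : List (Int × Int))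
    (hok : ∀ p ∈ results, (0 ≤ n) ∧ -(n+1) ≤ p.1 ∧ p.1 ≤ n ∧ -(n+1) ≤ p.2 ∧ p.2 ≤ n) :
    MRel false n (pvMat n results) (pvFB n results) := by
  unfold pvMat pvFB
  refine foldl_rel (MRel false n) _ _ results _ _ ?_ (mrel_init false n)
  intro g f p hp hrel
  rcases hok p hp with ⟨hn', h1, h2, h3, h4⟩
  exact wstep_rel true hrel hn' h1 h2 h3 h4

-- ---------- port-A fold computations ----------

theorem pvUpd_idem {g : Int → Int → Int} {a b v : Int} :
    pvUpd (pvUpd g a b v) a b v = pvUpd g a b v := by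
  funext x y; simp only [pvUpd]; split_ifs <;> rfl

theorem gw_eval {α : Type} (n : Int) (results : List (Int × Int)) (c : α)
    (g : Int → Int → α) (x y : Int) :
    (results.foldl (fun f p => if 1 ≤ pvW n p.1 ∧ 1 ≤ pvW n p.2
        then pvUpd f (pvW n p.1) (pvW n p.2) c else f) g) x y
      = if (∃ p ∈ results, pvW n p.1 = x ∧ pvW n p.2 = y ∧ 1 ≤ x ∧ 1 ≤ y)
        then c else g x y := by
  induction results generalizing g with
  | nil => simp
  | cons p ps ih =>
    simp only [List.foldl_cons]
    rw [ih]
    by_cases hmem : ∃ q ∈ ps, pvW n q.1 = x ∧ pvW n q.2 = y ∧ 1 ≤ x ∧ 1 ≤ y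
    · rw [if_pos hmem]
      obtain ⟨q, hq, hqs⟩ := hmem
      rw [if_pos ⟨q, List.mem_cons.2 (Or.inr hq), hqs⟩]
    · rw [if_neg hmem]
      by_cases hv : 1 ≤ pvW n p.1 ∧ 1 ≤ pvW n p.2
      · rw [if_pos hv]
        show (if x = pvW n p.1 ∧ y = pvW n p.2 then c else g x y) = _
        by_cases hxy : x = pvW n p.1 ∧ y = pvW n p.2
        · rw [if_pos hxy,
            if_pos ⟨p, List.mem_cons.2 (Or.inl rfl), hxy.1.symm, hxy.2.symm,
              hxy.1 ▸ hv.1, hxy.2 ▸ hv.2⟩]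
        · rw [if_neg hxy, if_neg ?_]
          rintro ⟨q, hq, e1, e2, hb1, hb2⟩
          rcases List.mem_cons.1 hq with rfl | hq'
          · exact hxy ⟨e1.symm, e2.symm⟩
          · exact hmem ⟨q, hq', e1, e2, hb1, hb2⟩
      · rw [if_neg hv, if_neg ?_]
        rintro ⟨q, hq, e1, e2, hb1, hb2⟩
        rcases List.mem_cons.1 hq with rfl | hq'
        · exact hv ⟨e1 ▸ hb1, e2 ▸ hb2⟩
        · exact hmem ⟨q, hq', e1, e2, hb1, hb2⟩

theorem fB_true_iff (n : Int) (results : List (Int × Int)) (x y : Int) :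
    (pvFB n results x y = true)
      ↔ (∃ p ∈ results, pvW n p.1 = x ∧ pvW n p.2 = y ∧ 1 ≤ x ∧ 1 ≤ y) := by
  unfold pvFB
  rw [gw_eval]
  split_ifs with h
  · simpa using h
  · simpa using h

theorem g2_inner (l : List Int) (a : Int) (g : Int → Int → Int) :
    l.foldl (fun g b => if a = b then pvUpd g a b 0 else g) g
      = if a ∈ l then pvUpd g a a 0 else g := by
  induction l generalizing g with
  | nil => simp
  | cons b bs ih =>
    simp only [List.foldl_cons]
    by_cases hab : a = b
    · subst hab
      simp [ih, pvUpd_idem]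
    · simp [hab, ih, List.mem_cons]

theorem g2_outer (rng : List Int) (l : List Int) (g : Int → Int → Int) (x y : Int) :
    (l.foldl (fun g a => rng.foldl (fun g b => if a = b then pvUpd g a b 0 else g) g) g) x y
      = if x ∈ l ∧ x ∈ rng ∧ x = y then 0 else g x y := by
  induction l generalizing g with
  | nil => simp
  | cons a as ih =>
    simp only [List.foldl_cons]
    rw [g2_inner, ih]
    by_cases h1 : x ∈ as ∧ x ∈ rng ∧ x = y
    · rw [if_pos h1, if_pos ⟨List.mem_cons.2 (Or.inr h1.1), h1.2⟩]
    · rw [if_neg h1]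
      by_cases h2 : x ∈ a :: as ∧ x ∈ rng ∧ x = y
      · rw [if_pos h2]
        have hxa : x = a := by
          rcases List.mem_cons.1 h2.1 with h' | h'
          · exact h'
          · exact absurd ⟨h', h2.2⟩ h1
        rw [if_pos (hxa ▸ h2.2.1)]
        simp [pvUpd, hxa, h2.2.2.symm.trans hxa]
      · rw [if_neg h2]
        by_cases h3 : a ∈ rng
        · rw [if_pos h3]
          have : ¬ (x = a ∧ y = a) := by
            rintro ⟨rfl, rfl⟩
            exact h2 ⟨List.mem_cons_self, h3, rfl⟩
          simp [pvUpd, this]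
        · rw [if_neg h3]

theorem g2_eval (rng : List Int) (g : Int → Int → Int) (x y : Int) :
    (rng.foldl (fun g a => rng.foldl (fun g b => if a = b then pvUpd g a b 0 else g) g) g) x y
      = if x ∈ rng ∧ x = y then 0 else g x y := by
  rw [g2_outer]
  by_cases h : x ∈ rng ∧ x = y
  · simp [h]
  · rw [if_neg h, if_neg (by intro h'; exact h ⟨h'.1, h'.2.2⟩)]

theorem roundInner (rng adone : List Int) (k a : Int) (g : Int → Int → Int)
    (hkk : g k k = 0) (ha : a ∉ adone) :
    ∀ (bs done : List Int), (∀ y ∈ bs, y ∉ done) → bs.Nodup →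
    ∀ h : Int → Int → Int,
      (∀ x y, h x y = if (x ∈ adone ∧ y ∈ rng) ∨ (x = a ∧ y ∈ done)
          then min (g x k + g k y) (g x y) else g x y) →
      ∀ x y, (bs.foldl (fun m b => pvUpd m a b (min (m a k + m k b) (m a b))) h) x y
        = if (x ∈ adone ∧ y ∈ rng) ∨ (x = a ∧ (y ∈ done ∨ y ∈ bs))
          then min (g x k + g k y) (g x y) else g x y := by
  intro bs
  induction bs with
  | nil =>
    intro done _ _ h hh x y
    simp only [List.foldl_nil]
    rw [hh]
    simp only [List.not_mem_nil, or_false]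
  | cons b bs ih =>
    intro done hdisj hnd h hh x y
    simp only [List.foldl_cons]
    have hak : h a k = g a k := by
      rw [hh]; split_ifs with hc
      · show min (g a k + g k k) (g a k) = g a k
        rw [hkk]; simp
      · rfl
    have hkb : h k b = g k b := by
      rw [hh]; split_ifs with hc
      · show min (g k k + g k b) (g k b) = g k b
        rw [hkk]; simp
      · rfl
    have hab : h a b = g a b := by
      rw [hh, if_neg ?_]
      rintro (⟨h1, _⟩ | ⟨_, h2⟩)
      · exact ha h1
      · exact hdisj b List.mem_cons_self h2
    rw [hak, hkb, hab]
    have hdisj' : ∀ y ∈ bs, y ∉ done ++ [b] := by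
      intro z hz
      simp only [List.mem_append, List.mem_singleton]
      rintro (h' | rfl)
      · exact hdisj z (List.mem_cons.2 (Or.inr hz)) h'
      · exact (List.nodup_cons.1 hnd).1 hz
    have hh' : ∀ x y, (pvUpd h a b (min (g a k + g k b) (g a b))) x y
        = if (x ∈ adone ∧ y ∈ rng) ∨ (x = a ∧ y ∈ done ++ [b])
          then min (g x k + g k y) (g x y) else g x y := by
      intro x y
      simp only [pvUpd]
      by_cases hxy : x = a ∧ y = b
      · obtain ⟨rfl, rfl⟩ := hxy
        rw [if_pos ⟨rfl, rfl⟩, if_pos (Or.inr ⟨rfl, by simp⟩)]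
      · rw [if_neg hxy, hh]
        refine if_congr ?_ rfl rfl
        simp only [List.mem_append, List.mem_singleton]
        tauto
    rw [ih (done ++ [b]) hdisj' (List.nodup_cons.1 hnd).2 _ hh' x y]
    refine if_congr ?_ rfl rfl
    simp only [List.mem_append, List.mem_singleton, List.mem_cons]
    tauto

theorem roundOuter (rng : List Int) (k : Int) (g : Int → Int → Int) (hkk : g k k = 0)
    (hrnd : rng.Nodup) :
    ∀ (as adone : List Int), (∀ y ∈ as, y ∉ adone) → as.Nodup →
    ∀ h, (∀ x y, h x y = if x ∈ adone ∧ y ∈ rng then min (g x k + g k y) (g x y) else g x y) →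
    ∀ x y, (as.foldl (fun m a => rng.foldl (fun m b =>
        pvUpd m a b (min (m a k + m k b) (m a b))) m) h) x y
      = if (x ∈ adone ∨ x ∈ as) ∧ y ∈ rng then min (g x k + g k y) (g x y) else g x y := by
  intro as
  induction as with
  | nil =>
    intro adone _ _ h hh x y
    simp only [List.foldl_nil]
    rw [hh]
    simp only [List.not_mem_nil, or_false]
  | cons a as ih =>
    intro adone hdisj hnd h hh x y
    simp only [List.foldl_cons]
    have ha : a ∉ adone := hdisj a List.mem_cons_self
    have hh0 : ∀ x y, h x y = if (x ∈ adone ∧ y ∈ rng) ∨ (x = a ∧ y ∈ ([] : List Int))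
        then min (g x k + g k y) (g x y) else g x y := by
      intro x y
      rw [hh]
      refine if_congr ?_ rfl rfl
      simp
    have hinner := roundInner rng adone k a g hkk ha rng [] (by simp) hrnd h hh0
    have hdisj' : ∀ y ∈ as, y ∉ adone ++ [a] := by
      intro z hz
      simp only [List.mem_append, List.mem_singleton]
      rintro (h' | rfl)
      · exact hdisj z (List.mem_cons.2 (Or.inr hz)) h'
      · exact (List.nodup_cons.1 hnd).1 hz
    have hh1 : ∀ x y, (rng.foldl (fun m b =>
          pvUpd m a b (min (m a k + m k b) (m a b))) h) x y
        = if x ∈ adone ++ [a] ∧ y ∈ rng then min (g x k + g k y) (g x y) else g x y := by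
      intro x y
      rw [hinner x y]
      refine if_congr ?_ rfl rfl
      simp only [List.mem_append, List.mem_singleton, List.not_mem_nil, false_or]
      tauto
    rw [ih (adone ++ [a]) hdisj' (List.nodup_cons.1 hnd).2 _ hh1 x y]
    refine if_congr ?_ rfl rfl
    simp only [List.mem_append, List.mem_singleton, List.mem_cons]
    tauto

theorem round_eval (rng : List Int) (hnd : rng.Nodup) (k : Int) (g : Int → Int → Int)
    (hkk : g k k = 0) (x y : Int) :
    (rng.foldl (fun g a => rng.foldl (fun g b =>
        pvUpd g a b (min (g a k + g k b) (g a b))) g) g) x y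
      = if x ∈ rng ∧ y ∈ rng then min (g x k + g k y) (g x y) else g x y := by
  rw [roundOuter rng k g hkk hnd rng [] (by simp) hnd g (by intro x y; simp) x y]
  refine if_congr ?_ rfl rfl
  simp

theorem kfold_aux {E : Int → Int → Prop} {n : Int} {S : Finset Int}
    (hES : ∀ u v, E u v → v ∈ S) (hS : (S.card : Int) ≤ 499999999) :
    ∀ (fuel : ℕ) (lo : Int), (n + 1 - lo).toNat = fuel → 1 ≤ lo → lo ≤ n + 1 →
    ∀ g, InvFW E n (lo - 1) g →
      InvFW E n n ((PySem.List.pyRange lo (n+1)).foldl (fun g k =>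
        (PySem.List.pyRange 1 (n+1)).foldl (fun g a => (PySem.List.pyRange 1 (n+1)).foldl (fun g b =>
          pvUpd g a b (min (g a k + g k b) (g a b))) g) g) g) := by
  intro fuel
  induction fuel with
  | zero =>
    intro lo hfuel h1 h2 g hg
    have hnil : PySem.List.pyRange lo (n+1) = [] :=
      PySem.List.pyRange_one_eq_nil (by omega)
    rw [hnil]
    simp only [List.foldl_nil]
    have heq : lo - 1 = n := by omega
    rwa [heq] at hg
  | succ fuel ih =>
    intro lo hfuel h1 h2 g hg
    have hlt : lo < n + 1 := by omega
    have hcons : PySem.List.pyRange lo (n+1) = lo :: PySem.List.pyRange (lo+1) (n+1) :=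
      PySem.List.pyRange_one_cons hlt
    rw [hcons]
    simp only [List.foldl_cons]
    have htriv : HasW E (lo - 1) lo lo 0 :=
      ⟨[lo], ⟨⟨by simp, by simp, by simp⟩, by simp [InterL]⟩, by simp⟩
    have hkk : g lo lo = 0 := by
      rcases hg lo lo h1 (by omega) h1 (by omega) with ⟨hI, hno⟩ | ⟨m, hm, hv, hmin⟩
      · exact absurd htriv (hno 0)
      · have hm0 : m = 0 := Nat.le_zero.1 (hmin 0 htriv)
        rw [hv, hm0]; rfl
    refine ih (lo + 1) (by omega) (by omega) (by omega) _ ?_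
    intro a b ha1 ha2 hb1 hb2
    have heq : lo + 1 - 1 = lo := by omega
    rw [heq]
    rw [round_eval _ (PySem.List.nodup_pyRange_one 1 (n+1)) lo g hkk a b]
    rw [if_pos ⟨PySem.List.mem_pyRange_one.2 ⟨ha1, by omega⟩,
        PySem.List.mem_pyRange_one.2 ⟨hb1, by omega⟩⟩]
    exact good_step hES hS h1
      (hg a lo ha1 ha2 h1 (by omega)) (hg lo b h1 (by omega) hb1 hb2)
      (hg a b ha1 ha2 hb1 hb2)

theorem kfold_inv {E : Int → Int → Prop} {n : Int} {S : Finset Int}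
    (hES : ∀ u v, E u v → v ∈ S) (hS : (S.card : Int) ≤ 499999999)
    (g : Int → Int → Int) (hg : InvFW E n 0 g) (hn1 : 0 ≤ n) :
    InvFW E n n ((PySem.List.pyRange 1 (n+1)).foldl (fun g k =>
      (PySem.List.pyRange 1 (n+1)).foldl (fun g a => (PySem.List.pyRange 1 (n+1)).foldl (fun g b =>
        pvUpd g a b (min (g a k + g k b) (g a b))) g) g) g) :=
  kfold_aux hES hS (n + 1 - 1).toNat 1 rfl le_rfl (by omega) g (by simpa using hg)


-- ---------- port-B computations ----------

-- every entry of an adjacency row of pvAdj/pvRadj is a node of 1..n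
theorem row_targets_generic {n : Int} (P : Int → Int → Bool) :
    ∀ u v, v ∈ pvRow ((PySem.List.pyRange 0 (n+1)).map (fun t =>
        (PySem.List.pyRange 1 (n+1)).filter (P t))) u → 1 ≤ v ∧ v ≤ n := by
  intro u v hv
  unfold pvRow at hv
  rcases hrow : ((PySem.List.pyRange 0 (n+1)).map (fun t =>
      (PySem.List.pyRange 1 (n+1)).filter (P t)))[(pvIdx
        ((PySem.List.pyRange 0 (n+1)).map (fun t =>
          (PySem.List.pyRange 1 (n+1)).filter (P t))).length u).toNat]? with _ | row
  · rw [hrow] at hv; simp at hv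
  · rw [hrow] at hv
    simp only [Option.getD_some] at hv
    have hmem : row ∈ (PySem.List.pyRange 0 (n+1)).map (fun t =>
        (PySem.List.pyRange 1 (n+1)).filter (P t)) := List.mem_of_getElem? hrow
    obtain ⟨t, _, rfl⟩ := List.mem_map.1 hmem
    have := List.mem_filter.1 hv
    rcases PySem.List.mem_pyRange_one.1 this.1 with ⟨h1, h2⟩
    exact ⟨h1, by omega⟩

-- reading the adjacency row of a node 1..n
theorem pvRow_map_pyRange {n : Int} (f : Int → List Int) (u : Int)
    (h0 : 0 ≤ u) (h2 : u ≤ n) :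
    pvRow ((PySem.List.pyRange 0 (n+1)).map f) u = f u := by
  have hlen : ((PySem.List.pyRange 0 (n+1)).map f).length = (n+1-0).toNat := by
    rw [List.length_map, PySem.List.length_pyRange_one]
  have hlt : u.toNat < ((PySem.List.pyRange 0 (n+1)).map f).length := by
    rw [hlen]; omega
  unfold pvRow
  rw [pvIdx_nonneg _ h0]
  rw [List.getElem?_eq_getElem hlt, Option.getD_some, List.getElem_map,
    PySem.List.getElem_pyRange_one]
  congr 1
  omega

theorem adj_row_iff (n : Int) (results : List (Int × Int))
    (hok : ∀ p ∈ results, (0 ≤ n) ∧ -(n+1) ≤ p.1 ∧ p.1 ≤ n ∧ -(n+1) ≤ p.2 ∧ p.2 ≤ n)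
    (u v : Int) (h1 : 1 ≤ u) (h2 : u ≤ n) :
    v ∈ pvRow (pvAdj n results) u ↔ EdgW n results u v := by
  unfold pvAdj
  rw [pvRow_map_pyRange _ u (by omega) h2, List.mem_filter, PySem.List.mem_pyRange_one]
  constructor
  · rintro ⟨⟨hv1, hv2⟩, hm⟩
    rw [(mat_rel n results hok).2.2 u v h1 h2 hv1 (by omega)] at hm
    rcases (fB_true_iff n results u v).1 hm with ⟨p, hp, e1, e2, _, _⟩
    exact ⟨⟨p, hp, e1, e2⟩, h1, h2, hv1, by omega⟩
  · rintro ⟨⟨p, hp, e1, e2⟩, _, _, hv1, hv2⟩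
    refine ⟨⟨hv1, by omega⟩, ?_⟩
    rw [(mat_rel n results hok).2.2 u v h1 h2 hv1 hv2]
    exact (fB_true_iff n results u v).2 ⟨p, hp, e1, e2, h1, hv1⟩

theorem radj_row_iff (n : Int) (results : List (Int × Int))
    (hok : ∀ p ∈ results, (0 ≤ n) ∧ -(n+1) ≤ p.1 ∧ p.1 ≤ n ∧ -(n+1) ≤ p.2 ∧ p.2 ≤ n)
    (u v : Int) (h1 : 1 ≤ u) (h2 : u ≤ n) :
    v ∈ pvRow (pvRadj n results) u ↔ EdgW n results v u := by
  unfold pvRadj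
  rw [pvRow_map_pyRange _ u (by omega) h2, List.mem_filter, PySem.List.mem_pyRange_one]
  constructor
  · rintro ⟨⟨hv1, hv2⟩, hm⟩
    rw [(mat_rel n results hok).2.2 v u hv1 (by omega) h1 h2] at hm
    rcases (fB_true_iff n results v u).1 hm with ⟨p, hp, e1, e2, _, _⟩
    exact ⟨⟨p, hp, e1, e2⟩, hv1, by omega, h1, h2⟩
  · rintro ⟨⟨p, hp, e1, e2⟩, hv1, hv2, _, _⟩
    refine ⟨⟨hv1, by omega⟩, ?_⟩
    rw [(mat_rel n results hok).2.2 v u hv1 hv2 h1 h2]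
    exact (fB_true_iff n results v u).2 ⟨p, hp, e1, e2, hv1, h1⟩

theorem rle_zero {E : Int → Int → Prop} {a v : Int} : Rle E 0 a v ↔ v = a := by
  constructor
  · rintro ⟨w, ⟨hc, hh, hl⟩, hlen⟩
    rcases w with _ | ⟨x, t⟩
    · simp at hh
    · have ht : t = [] := by
        rcases t with _ | _
        · rfl
        · simp at hlen
      subst ht
      have h1 : x = a := by simpa using hh
      have h2 : x = v := by simpa using hl
      rw [← h1, h2]
  · rintro rfl
    exact ⟨[v], ⟨by simp, by simp, by simp⟩, by simp⟩

theorem rle_mono {E : Int → Int → Prop} {t t' : ℕ} {a v : Int} (h : t ≤ t')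
    (hr : Rle E t a v) : Rle E t' a v := by
  obtain ⟨w, hw, hlen⟩ := hr
  exact ⟨w, hw, by omega⟩

theorem rle_succ {E : Int → Int → Prop} {t : ℕ} {a v : Int} :
    Rle E (t+1) a v ↔ Rle E t a v ∨ ∃ u, Rle E t a u ∧ E u v := by
  constructor
  · rintro ⟨w, ⟨hc, hh, hl⟩, hlen⟩
    by_cases hsm : w.length ≤ t + 1
    · exact Or.inl ⟨w, ⟨hc, hh, hl⟩, hsm⟩
    · have hne : w ≠ [] := by intro hnil; rw [hnil] at hh; simp at hh
      have h2 : 2 ≤ w.length := by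
        rcases w with _ | ⟨x, _ | _⟩ <;> simp_all <;> omega
      have hdec := List.dropLast_append_getLast hne
      have hlast : w.getLast hne = v := by
        rw [List.getLast?_eq_some_getLast hne] at hl; simpa using hl
      have hdne : w.dropLast ≠ [] := by
        intro hnil
        have := congrArg List.length hdec
        simp [hnil] at this; omega
      have hu := List.getLast?_eq_some_getLast hdne
      refine Or.inr ⟨w.dropLast.getLast hdne, ⟨w.dropLast, ⟨?_, ?_, hu⟩, ?_⟩, ?_⟩
      · have := hc
        rw [← hdec] at this
        exact this.left_of_append
      · rw [← hdec] at hh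
        rw [List.head?_append] at hh
        rcases ho : w.dropLast.head? with _ | z
        · exact absurd ho (by simp [hdne])
        · rw [ho] at hh; simpa using hh
      · simp only [List.length_dropLast]; omega
      · have hcc := hc
        rw [← hdec] at hcc
        rcases List.isChain_append.1 hcc with ⟨_, _, hlink⟩
        have := hlink (w.dropLast.getLast hdne) (by simp [hu]) (w.getLast hne) (by simp)
        rwa [hlast] at this
  · rintro (h | ⟨u, ⟨w, ⟨hc, hh, hl⟩, hlen⟩, he⟩)
    · exact rle_mono (by omega) h
    · refine ⟨w ++ [v], ⟨?_, ?_, List.getLast?_concat⟩, by simp; omega⟩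
      · refine List.IsChain.append hc (by simp) ?_
        intro x hx y hy
        rw [hl] at hx; simp at hx hy; subst hx; subst hy
        exact he
      · have hne : w ≠ [] := by intro hnil; rw [hnil] at hh; simp at hh
        rw [List.head?_append]
        rcases ho : w.head? with _ | z
        · exact absurd ho (by simp [hne])
        · rw [ho] at hh; simpa using hh

theorem bfs_inner (vs : List Int) :
    ∀ (q : PySem.Set Int × List Int), q.1.Nodup →
      (∀ x, x ∈ (vs.foldl (fun (q : PySem.Set Int × List Int) v =>
          if q.1.contains v then q else (PySem.Set.add q.1 v, q.2 ++ [v])) q).1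
        ↔ x ∈ q.1 ∨ x ∈ vs)
      ∧ (∀ x, x ∈ (vs.foldl (fun (q : PySem.Set Int × List Int) v =>
          if q.1.contains v then q else (PySem.Set.add q.1 v, q.2 ++ [v])) q).2
        ↔ x ∈ q.2 ∨ (x ∈ vs ∧ x ∉ q.1))
      ∧ (vs.foldl (fun (q : PySem.Set Int × List Int) v =>
          if q.1.contains v then q else (PySem.Set.add q.1 v, q.2 ++ [v])) q).1.Nodup := by
  induction vs with
  | nil => intro q hnd; simp [hnd]
  | cons v vs ih =>
    intro q hnd
    simp only [List.foldl_cons]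
    by_cases hv : v ∈ q.1
    · rw [if_pos (by simpa [PySem.Set.contains_iff] using hv)]
      rcases ih q hnd with ⟨h1, h2, h3⟩
      refine ⟨?_, ?_, h3⟩
      · intro x
        rw [h1 x]
        simp only [List.mem_cons]
        by_cases hxv : x = v
        · subst hxv; tauto
        · tauto
      · intro x
        rw [h2 x]
        simp only [List.mem_cons]
        by_cases hxv : x = v
        · subst hxv; tauto
        · tauto
    · rw [if_neg (by simpa [PySem.Set.contains_iff] using hv)]
      rcases ih (PySem.Set.add q.1 v, q.2 ++ [v]) (PySem.Set.nodup_add q.1 v hnd) with ⟨h1, h2, h3⟩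
      refine ⟨?_, ?_, h3⟩
      · intro x
        rw [h1 x]
        simp [PySem.Set.mem_add, List.mem_cons]
        by_cases hxv : x = v
        · subst hxv; tauto
        · tauto
      · intro x
        rw [h2 x]
        simp [PySem.Set.mem_add, List.mem_cons]
        by_cases hxv : x = v
        · subst hxv; tauto
        · tauto

theorem bfs_round (g : List (List Int)) (us : List Int) :
    ∀ (q : PySem.Set Int × List Int), q.1.Nodup →
      (∀ x, x ∈ (us.foldl (fun (q : PySem.Set Int × List Int) u =>
          (pvRow g u).foldl (fun (q : PySem.Set Int × List Int) v =>
            if q.1.contains v then q else (PySem.Set.add q.1 v, q.2 ++ [v])) q) q).1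
        ↔ x ∈ q.1 ∨ ∃ u ∈ us, x ∈ pvRow g u)
      ∧ (∀ x, x ∈ (us.foldl (fun (q : PySem.Set Int × List Int) u =>
          (pvRow g u).foldl (fun (q : PySem.Set Int × List Int) v =>
            if q.1.contains v then q else (PySem.Set.add q.1 v, q.2 ++ [v])) q) q).2
        ↔ x ∈ q.2 ∨ ((∃ u ∈ us, x ∈ pvRow g u) ∧ x ∉ q.1))
      ∧ (us.foldl (fun (q : PySem.Set Int × List Int) u =>
          (pvRow g u).foldl (fun (q : PySem.Set Int × List Int) v =>
            if q.1.contains v then q else (PySem.Set.add q.1 v, q.2 ++ [v])) q) q).1.Nodup := by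
  induction us with
  | nil => intro q hnd; simp [hnd]
  | cons u us ih =>
    intro q hnd
    simp only [List.foldl_cons]
    rcases bfs_inner (pvRow g u) q hnd with ⟨h1, h2, h3⟩
    rcases ih _ h3 with ⟨h1', h2', h3'⟩
    refine ⟨?_, ?_, h3'⟩
    · intro x
      rw [h1' x, h1 x]
      simp only [List.mem_cons, exists_eq_or_imp]
      tauto
    · intro x
      rw [h2' x, h2 x, h1 x]
      simp only [List.mem_cons, exists_eq_or_imp]
      tauto

theorem bfs_rounds {E : Int → Int → Prop} (g : List (List Int)) (start : Int)
    (hEg : ∀ u v, E u v ↔ v ∈ pvRow g u) :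
    ∀ (l : List Int) (t : ℕ) (q : PySem.Set Int × List Int), q.1.Nodup →
      (∀ x, x ∈ q.1 ↔ Rle E t start x) →
      (∀ x, x ∈ q.2 ↔ Rle E t start x ∧ (t = 0 ∨ ¬ Rle E (t-1) start x)) →
      (∀ x, x ∈ (l.foldl (fun (st : PySem.Set Int × List Int) _ =>
          st.2.foldl (fun (q : PySem.Set Int × List Int) u =>
            (pvRow g u).foldl (fun (q : PySem.Set Int × List Int) v =>
              if q.1.contains v then q else (PySem.Set.add q.1 v, q.2 ++ [v])) q)
          (st.1, [])) q).1 ↔ Rle E (t + l.length) start x)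
      ∧ (l.foldl (fun (st : PySem.Set Int × List Int) _ =>
          st.2.foldl (fun (q : PySem.Set Int × List Int) u =>
            (pvRow g u).foldl (fun (q : PySem.Set Int × List Int) v =>
              if q.1.contains v then q else (PySem.Set.add q.1 v, q.2 ++ [v])) q)
          (st.1, [])) q).1.Nodup := by
  intro l
  induction l with
  | nil =>
    intro t q hnd hseen hfr
    simpa using ⟨hseen, hnd⟩
  | cons c l ih =>
    intro t q hnd hseen hfr
    simp only [List.foldl_cons]
    rcases bfs_round g q.2 (q.1, []) hnd with ⟨h1, h2, h3⟩
    have hseen' : ∀ x, x ∈ (q.2.foldl (fun (q : PySem.Set Int × List Int) u =>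
        (pvRow g u).foldl (fun (q : PySem.Set Int × List Int) v =>
          if q.1.contains v then q else (PySem.Set.add q.1 v, q.2 ++ [v])) q) (q.1, [])).1
        ↔ Rle E (t+1) start x := by
      intro x
      rw [h1 x]
      constructor
      · rintro (hx | ⟨u, hu, hx⟩)
        · exact rle_mono (by omega) ((hseen x).1 hx)
        · exact rle_succ.2 (Or.inr ⟨u, ((hfr u).1 hu).1, (hEg u x).2 hx⟩)
      · intro hx
        rcases rle_succ.1 hx with hx' | ⟨u, hu, he⟩
        · exact Or.inl ((hseen x).2 hx')
        · by_cases hxt : Rle E t start x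
          · exact Or.inl ((hseen x).2 hxt)
          · refine Or.inr ⟨u, (hfr u).2 ⟨hu, ?_⟩, (hEg u x).1 he⟩
            rcases Nat.eq_zero_or_pos t with rfl | ht
            · exact Or.inl rfl
            · refine Or.inr ?_
              intro hu'
              apply hxt
              have hstep : Rle E ((t-1)+1) start x := rle_succ.2 (Or.inr ⟨u, hu', he⟩)
              rwa [show t - 1 + 1 = t from by omega] at hstep
    have hfr' : ∀ x, x ∈ (q.2.foldl (fun (q : PySem.Set Int × List Int) u =>
        (pvRow g u).foldl (fun (q : PySem.Set Int × List Int) v =>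
          if q.1.contains v then q else (PySem.Set.add q.1 v, q.2 ++ [v])) q) (q.1, [])).2
        ↔ Rle E (t+1) start x ∧ (t + 1 = 0 ∨ ¬ Rle E (t+1-1) start x) := by
      intro x
      rw [h2 x]
      simp only [List.not_mem_nil, false_or, Nat.add_sub_cancel]
      constructor
      · rintro ⟨⟨u, hu, hx⟩, hnx⟩
        refine ⟨rle_succ.2 (Or.inr ⟨u, ((hfr u).1 hu).1, (hEg u x).2 hx⟩), Or.inr ?_⟩
        intro hxt
        exact hnx ((hseen x).2 hxt)
      · rintro ⟨hx, hor⟩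
        have hnxt : ¬ Rle E t start x := by
          rcases hor with h0 | h'
          · omega
          · exact h'
        rcases rle_succ.1 hx with hx' | ⟨u, hu, he⟩
        · exact absurd hx' hnxt
        · refine ⟨⟨u, (hfr u).2 ⟨hu, ?_⟩, (hEg u x).1 he⟩, fun hq => hnxt ((hseen x).1 hq)⟩
          rcases Nat.eq_zero_or_pos t with rfl | ht
          · exact Or.inl rfl
          · refine Or.inr ?_
            intro hu'
            apply hnxt
            have hstep : Rle E ((t-1)+1) start x := rle_succ.2 (Or.inr ⟨u, hu', he⟩)
            rwa [show t - 1 + 1 = t from by omega] at hstep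
    rcases ih (t+1) _ h3 hseen' hfr' with ⟨ha, hb⟩
    refine ⟨?_, hb⟩
    intro x
    rw [ha x]
    have heq : t + 1 + l.length = t + (l.length + 1) := by omega
    rw [heq]
    simp

-- BFS characterization: membership in pvReach is bounded reachability
theorem pvReach_spec {E : Int → Int → Prop} (n : Int) (g : List (List Int)) (start : Int)
    (hEg : ∀ u v, E u v ↔ v ∈ pvRow g u) :
    (∀ v, v ∈ pvReach n g start ↔ Rle E n.toNat start v)
    ∧ (pvReach n g start).Nodup := by
  unfold pvReach
  rcases bfs_rounds g start hEg (PySem.List.pyRange 0 n) 0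
      (PySem.Set.ofList [start], [start])
      (PySem.Set.nodup_ofList [start])
      (by intro x; rw [rle_zero]; simp [PySem.Set.mem_ofList])
      (by intro x; rw [rle_zero]; simp [PySem.Set.mem_ofList]) with ⟨h1, h2⟩
  refine ⟨?_, h2⟩
  intro v
  rw [h1 v]
  have : (PySem.List.pyRange 0 n).length = n.toNat := by
    rw [PySem.List.length_pyRange_one]; simp
  rw [this]
  simp

theorem walk_to_VW {E : Int → Int → Prop} {n a v : Int} {w : List Int}
    (hE : ∀ u v, E u v → 1 ≤ v ∧ v ≤ n)
    (ha : 1 ≤ a ∧ a ≤ n) (hw : IsWalkP E a v w) : VW E n a v w := by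
  refine ⟨hw, ?_⟩
  intro x hx
  have hxw : x ∈ w := (List.tail_sublist w).subset
    ((List.dropLast_sublist w.tail).subset hx)
  rcases mem_chain_head_or_edge hw.1 hw.2.1 hxw with rfl | ⟨u, hu⟩
  · exact ha
  · exact hE u x hu

theorem hasAny_iff_rle {E : Int → Int → Prop} {n a : Int} {v : Int}
    (hE : ∀ u v, E u v → 1 ≤ v ∧ v ≤ n)
    (ha : 1 ≤ a ∧ a ≤ n) :
    HasAny E a v ↔ Rle E n.toNat a v := by
  constructor
  · rintro ⟨w, hw⟩
    obtain ⟨w', hw', hnd', hle'⟩ := shorten (walk_to_VW hE ha hw)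
    have hbd : (w'.length : Int) ≤ n :=
      nodup_len_le (by omega) hnd'
        (walk_mem_bounds hE le_rfl ha hw')
    refine ⟨w', hw'.1, ?_⟩
    omega
  · rintro ⟨w, hw, _⟩
    exact ⟨w, hw⟩

theorem isWalk_flip {E : Int → Int → Prop} {a b : Int} {w : List Int}
    (h : IsWalkP E a b w) : IsWalkP (fun u v => E v u) b a w.reverse := by
  obtain ⟨hc, hh, hl⟩ := h
  refine ⟨?_, ?_, ?_⟩
  · exact List.isChain_reverse.2 hc
  · rw [List.head?_reverse]; exact hl
  · rw [List.getLast?_reverse]; exact hh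

theorem hasAny_flip {E : Int → Int → Prop} {a b : Int} :
    HasAny (fun u v => E v u) a b ↔ HasAny E b a := by
  constructor
  · rintro ⟨w, hw⟩
    exact ⟨w.reverse, by simpa using isWalk_flip (E := fun u v => E v u) hw⟩
  · rintro ⟨w, hw⟩
    exact ⟨w.reverse, isWalk_flip hw⟩

theorem hasW_iff_hasAny {E : Int → Int → Prop} {n a b : Int}
    (hE : ∀ u v, E u v → 1 ≤ v ∧ v ≤ n)
    (ha : 1 ≤ a ∧ a ≤ n) :
    (∃ m, HasW E n a b m) ↔ HasAny E a b := by
  constructor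
  · rintro ⟨m, w, hw, _⟩
    exact ⟨w, hw.1⟩
  · rintro ⟨w, hw⟩
    have hne : w ≠ [] := by
      intro hnil; rw [hnil] at hw; rcases hw with ⟨_, hh, _⟩; simp at hh
    exact ⟨w.length - 1, w, walk_to_VW hE ha hw, by
      have : 1 ≤ w.length := List.length_pos_iff.2 hne
      omega⟩

theorem hasW_zero {E : Int → Int → Prop} {a b : Int} {m : ℕ} (h : HasW E 0 a b m) :
    (m = 0 ∧ a = b) ∨ (m = 1 ∧ E a b) := by
  obtain ⟨w, ⟨⟨hc, hh, hl⟩, hint⟩, hlen⟩ := h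
  have hnil : InterL w = [] := by
    rcases hI : InterL w with _ | ⟨z, zs⟩
    · rfl
    · have := hint z (by rw [hI]; exact List.mem_cons_self)
      omega
  rcases w with _ | ⟨x, t⟩
  · simp at hh
  · rcases t with _ | ⟨y, t'⟩
    · have h1 : x = a := by simpa using hh
      have h2 : x = b := by simpa using hl
      left
      constructor
      · simpa using hlen.symm
      · rw [← h1, h2]
    · rcases t' with _ | _
      · have h1 : x = a := by simpa using hh
        have h2 : y = b := by simpa using hl
        right
        constructor
        · simpa using hlen.symm
        · have := (List.isChain_cons_cons.1 hc).1
          rwa [h1, h2] at this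
      · exfalso
        simp [InterL] at hnil

theorem hasAny_endpoints {E : Int → Int → Prop} {x y : Int} (h : HasAny E x y) :
    x = y ∨ ∃ v, E x v := by
  obtain ⟨w, ⟨hc, hh, hl⟩⟩ := h
  rcases w with _ | ⟨z, t⟩
  · simp at hh
  · have hz : z = x := by simpa using hh
    rcases t with _ | ⟨z', t'⟩
    · left
      have : z = y := by simpa using hl
      rw [← hz, this]
    · right
      exact ⟨z', by rw [← hz]; exact (List.isChain_cons_cons.1 hc).1⟩

theorem good_ne_iff {E : Int → Int → Prop} {S : Finset Int} {k a b c : Int}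
    (hE : ∀ u v, E u v → v ∈ S) (hS : (S.card : Int) ≤ 499999999)
    (h : Good E k a b c) :
    (¬ c = 1000000000) ↔ ∃ m, HasW E k a b m := by
  rcases h with ⟨rfl, hno⟩ | ⟨m, hm, rfl, hmin⟩
  · constructor
    · intro hc; exact absurd rfl hc
    · rintro ⟨m, hm⟩; exact absurd hm (hno m)
  · constructor
    · intro _; exact ⟨m, hm⟩
    · intro _
      have := hasW_min_bound hE hm hmin
      intro hc
      rw [hc] at this
      omega

theorem count_len_eq (rng : List Int) (hnd : rng.Nodup) (P : Int → Prop) [DecidablePred P]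
    (s : PySem.Set Int) (hs : s.Nodup) (h : ∀ j, j ∈ s ↔ j ∈ rng ∧ P j) :
    rng.foldl (fun c j => if P j then c + 1 else c) (0 : Int) = PySem.Set.len s := by
  rw [PySem.List.foldl_ite_add_one, zero_add, List.countP_eq_length_filter]
  unfold PySem.Set.len
  congr 1
  apply List.Perm.length_eq
  refine (List.perm_ext_iff_of_nodup (List.Nodup.filter _ hnd) hs).2 ?_
  intro j
  rw [List.mem_filter, decide_eq_true_iff, h j]


-- walks transfer between edge relations that agree on sources 1..n
theorem isChain_imp_mem {E E' : Int → Int → Prop} :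
    ∀ {w : List Int}, List.IsChain E w →
      (∀ u v, u ∈ w → E u v → E' u v) → List.IsChain E' w := by
  intro w
  induction w with
  | nil => intro _ _; exact List.IsChain.nil
  | cons a t ih =>
    intro h himp
    cases t with
    | nil => simp
    | cons b t' =>
      rcases List.isChain_cons_cons.1 h with ⟨hab, htail⟩
      exact List.isChain_cons_cons.2 ⟨himp a b List.mem_cons_self hab,
        ih htail (fun u v hu => himp u v (List.mem_cons.2 (Or.inr hu)))⟩

theorem hasAny_imp {E E' : Int → Int → Prop} {n i j : Int}
    (htE : ∀ u v, E u v → 1 ≤ v ∧ v ≤ n)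
    (himp : ∀ u v, 1 ≤ u → u ≤ n → E u v → E' u v)
    (hi1 : 1 ≤ i) (hi2 : i ≤ n) (h : HasAny E i j) : HasAny E' i j := by
  obtain ⟨w, hc, hh, hl⟩ := h
  have hmem : ∀ u ∈ w, 1 ≤ u ∧ u ≤ n := by
    intro u hu
    rcases mem_chain_head_or_edge hc hh hu with rfl | ⟨x, hx⟩
    · exact ⟨hi1, hi2⟩
    · exact htE x u hx
  exact ⟨w, isChain_imp_mem hc (fun u v hu he => himp u v (hmem u hu).1 (hmem u hu).2 he),
    hh, hl⟩

-- counting over the matrix equals counting over the function model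
theorem answer_congr {n : Int} {g : List (List Int)} {f : Int → Int → Int}
    (h : MRel 1000000000 n g f) :
    (PySem.List.pyRange 1 (n+1)).foldl (fun answer i =>
        if (PySem.List.pyRange 1 (n+1)).foldl (fun c j =>
            if pvMget 1000000000 g i j ≠ 1000000000 ∨ pvMget 1000000000 g j i ≠ 1000000000
            then c + 1 else c) (0 : Int) = n
        then answer + 1 else answer) (0 : Int)
      = (PySem.List.pyRange 1 (n+1)).foldl (fun answer i =>
        if (PySem.List.pyRange 1 (n+1)).foldl (fun c j =>
            if f i j ≠ 1000000000 ∨ f j i ≠ 1000000000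
            then c + 1 else c) (0 : Int) = n
        then answer + 1 else answer) (0 : Int) := by
  apply PySem.List.foldl_congr_mem
  intro acc i hi
  rcases PySem.List.mem_pyRange_one.1 hi with ⟨hi1, hi2⟩
  have hcnt : (PySem.List.pyRange 1 (n+1)).foldl (fun c j =>
      if pvMget 1000000000 g i j ≠ 1000000000 ∨ pvMget 1000000000 g j i ≠ 1000000000
      then c + 1 else c) (0 : Int)
      = (PySem.List.pyRange 1 (n+1)).foldl (fun c j =>
      if f i j ≠ 1000000000 ∨ f j i ≠ 1000000000 then c + 1 else c) (0 : Int) := by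
    apply PySem.List.foldl_congr_mem
    intro c j hj
    rcases PySem.List.mem_pyRange_one.1 hj with ⟨hj1, hj2⟩
    rw [h.2.2 i j hi1 (by omega) hj1 (by omega),
        h.2.2 j i hj1 (by omega) hi1 (by omega)]
  rw [hcnt]

-- ===== VERDICT (by name: the statement is the Claim_ definition above) =====
theorem solution_spec : Claim_equal_solution := by
  intro n results _ hpre
  unfold Spec_solution
  rcases hpre with ⟨hok, hS⟩
  by_cases hn0 : n ≤ 0
  · have hnil : PySem.List.pyRange 1 (n+1) = [] := PySem.List.pyRange_one_eq_nil (by omega)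
    simp only [solution, solution_alt, hnil, List.foldl_nil]
  · push_neg at hn0
    -- the matrix fold tracks the function model pvF3 on coordinates 1..n
    have hrel1 : MRel 1000000000 n
        (results.foldl (fun g p => pvMset g p.1 p.2 1)
          (List.replicate (n+1).toNat (List.replicate (n+1).toNat 1000000000)))
        (pvF1 n results) := by
      unfold pvF1
      refine foldl_rel (MRel 1000000000 n) _ _ results _ _ ?_ (mrel_init 1000000000 n)
      intro g f p hp hrel
      rcases hok p hp with ⟨hn', h1, h2, h3, h4⟩
      exact wstep_rel 1 hrel hn' h1 h2 h3 h4
    have hrel2 : MRel 1000000000 n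
        ((PySem.List.pyRange 1 (n+1)).foldl (fun g a => (PySem.List.pyRange 1 (n+1)).foldl
            (fun g b => if a = b then pvMset g a b 0 else g) g)
          (results.foldl (fun g p => pvMset g p.1 p.2 1)
            (List.replicate (n+1).toNat (List.replicate (n+1).toNat 1000000000))))
        (pvF2 n results) := by
      unfold pvF2
      refine foldl_rel (MRel 1000000000 n) _ _ _ _ _ ?_ hrel1
      intro g f a ha hrel
      refine foldl_rel (MRel 1000000000 n) _ _ _ _ _ ?_ hrel
      intro g f b hb hrel
      rcases PySem.List.mem_pyRange_one.1 ha with ⟨ha1, ha2⟩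
      rcases PySem.List.mem_pyRange_one.1 hb with ⟨hb1, hb2⟩
      by_cases hab : a = b
      · rw [if_pos hab, if_pos hab]
        exact msetRel_in hrel ha1 (by omega) hb1 (by omega)
      · rw [if_neg hab, if_neg hab]
        exact hrel
    have hrel3 : MRel 1000000000 n
        ((PySem.List.pyRange 1 (n+1)).foldl (fun g k => (PySem.List.pyRange 1 (n+1)).foldl
            (fun g a => (PySem.List.pyRange 1 (n+1)).foldl (fun g b =>
              pvMset g a b (min (pvMget 1000000000 g a k + pvMget 1000000000 g k b)
                (pvMget 1000000000 g a b))) g) g)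
          ((PySem.List.pyRange 1 (n+1)).foldl (fun g a => (PySem.List.pyRange 1 (n+1)).foldl
              (fun g b => if a = b then pvMset g a b 0 else g) g)
            (results.foldl (fun g p => pvMset g p.1 p.2 1)
              (List.replicate (n+1).toNat (List.replicate (n+1).toNat 1000000000)))))
        (pvF3 n results) := by
      unfold pvF3
      refine foldl_rel (MRel 1000000000 n) _ _ _ _ _ ?_ hrel2
      intro g f k hk hrel
      rcases PySem.List.mem_pyRange_one.1 hk with ⟨hk1, hk2⟩
      refine foldl_rel (MRel 1000000000 n) _ _ _ _ _ ?_ hrel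
      intro g f a ha hrel
      rcases PySem.List.mem_pyRange_one.1 ha with ⟨ha1, ha2⟩
      refine foldl_rel (MRel 1000000000 n) _ _ _ _ _ ?_ hrel
      intro g f b hb hrel
      rcases PySem.List.mem_pyRange_one.1 hb with ⟨hb1, hb2⟩
      rw [hrel.2.2 a k ha1 (by omega) hk1 (by omega),
          hrel.2.2 k b hk1 (by omega) hb1 (by omega),
          hrel.2.2 a b ha1 (by omega) hb1 (by omega)]
      exact msetRel_in hrel ha1 (by omega) hb1 (by omega)
    -- step 1: A's answer equals the function-model answer
    have hA : solution n results
        = (PySem.List.pyRange 1 (n+1)).foldl (fun answer i =>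
            if (PySem.List.pyRange 1 (n+1)).foldl (fun c j =>
                if pvF3 n results i j ≠ 1000000000 ∨ pvF3 n results j i ≠ 1000000000
                then c + 1 else c) (0 : Int) = n
            then answer + 1 else answer) 0 := by
      simp only [solution]
      exact answer_congr hrel3
    rw [hA]
    -- step 2: the function-model answer equals B's answer
    simp only [solution_alt]
    apply PySem.List.foldl_congr_mem
    intro acc i hi
    rcases PySem.List.mem_pyRange_one.1 hi with ⟨hi1, hi2'⟩
    have hi2 : i ≤ n := by omega
    -- the effective edge relation and its basic bounds
    have htargE : ∀ u v, EdgW n results u v → 1 ≤ v ∧ v ≤ n := by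
      intro u v h
      exact ⟨h.2.2.2.1, h.2.2.2.2⟩
    have hsrcE : ∀ u v, EdgW n results u v → 1 ≤ u ∧ u ≤ n := by
      intro u v h
      exact ⟨h.2.1, h.2.2.1⟩
    have htargE' : ∀ u v, (fun u v => EdgW n results v u) u v → 1 ≤ v ∧ v ≤ n := by
      intro u v h
      exact hsrcE v u h
    -- edge targets lie in the wrapped distinct-endpoint set
    have hES : ∀ u v, EdgW n results u v → v ∈ (pvEpts results).image (pvW n) := by
      intro u v h
      obtain ⟨⟨p, hp, _, e2⟩, _⟩ := h
      refine Finset.mem_image.2 ⟨p.2, ?_, e2⟩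
      unfold pvEpts
      rw [List.mem_toFinset, List.mem_append]
      exact Or.inr (List.mem_map.2 ⟨p, hp, rfl⟩)
    have hS' : (((pvEpts results).image (pvW n)).card : Int) ≤ 499999999 := by
      have := Finset.card_image_le (s := pvEpts results) (f := pvW n)
      omega
    -- the function-model Floyd-Warshall matrix is Good at level n
    have hInv0 : InvFW (EdgW n results) n 0 (pvF2 n results) := by
      intro a b ha1 ha2 hb1 hb2
      have hval : pvF2 n results a b
          = if a ∈ PySem.List.pyRange 1 (n+1) ∧ a = b then 0
            else if (∃ p ∈ results, pvW n p.1 = a ∧ pvW n p.2 = b ∧ 1 ≤ a ∧ 1 ≤ b) then 1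
            else 1000000000 := by
        unfold pvF2 pvF1
        rw [g2_eval, gw_eval]
      rw [hval]
      by_cases hab : a = b
      · rw [if_pos ⟨PySem.List.mem_pyRange_one.2 ⟨ha1, by omega⟩, hab⟩]
        subst hab
        refine Or.inr ⟨0, ⟨[a], ⟨⟨by simp, by simp, by simp⟩, by simp [InterL]⟩, by simp⟩,
          by simp, fun m' _ => Nat.zero_le _⟩
      · rw [if_neg (fun hc => hab hc.2)]
        by_cases hedge : ∃ p ∈ results, pvW n p.1 = a ∧ pvW n p.2 = b
        · obtain ⟨p, hp, e1, e2⟩ := hedge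
          rw [if_pos ⟨p, hp, e1, e2, ha1, hb1⟩]
          refine Or.inr ⟨1, ⟨[a, b], ⟨⟨?_, by simp, by simp⟩, by simp [InterL]⟩, by simp⟩,
            by norm_num, ?_⟩
          · exact List.isChain_pair.2 ⟨⟨p, hp, e1, e2⟩, ha1, ha2, hb1, hb2⟩
          · intro m' hm'
            rcases hasW_zero hm' with ⟨_, hab'⟩ | ⟨hm1, _⟩
            · exact absurd hab' hab
            · omega
        · rw [if_neg (fun hc => hedge ⟨hc.choose, hc.choose_spec.1, hc.choose_spec.2.1,
            hc.choose_spec.2.2.1⟩)]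
          refine Or.inl ⟨rfl, ?_⟩
          intro m hm
          rcases hasW_zero hm with ⟨_, h⟩ | ⟨_, h⟩
          · exact hab h
          · exact hedge ⟨h.1.choose, h.1.choose_spec.1, h.1.choose_spec.2⟩
    have hInvN : InvFW (EdgW n results) n n (pvF3 n results) := by
      unfold pvF3
      exact kfold_inv hES hS' _ (by unfold pvF2 at hInv0; exact hInv0) (by omega)
    -- BFS reach sets are bounded reachability in the adjacency rows
    rcases pvReach_spec n (pvAdj n results) i
        (E := fun u v => v ∈ pvRow (pvAdj n results) u) (fun u v => Iff.rfl)
      with ⟨hfwd, hfwdnd⟩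
    rcases pvReach_spec n (pvRadj n results) i
        (E := fun u v => v ∈ pvRow (pvRadj n results) u) (fun u v => Iff.rfl)
      with ⟨hbwd, hbwdnd⟩
    have hadj_t : ∀ u v, v ∈ pvRow (pvAdj n results) u → 1 ≤ v ∧ v ≤ n := by
      unfold pvAdj
      exact row_targets_generic _
    have hradj_t : ∀ u v, v ∈ pvRow (pvRadj n results) u → 1 ≤ v ∧ v ≤ n := by
      unfold pvRadj
      exact row_targets_generic _
    -- walks in the adjacency rows are walks in the edge relation
    have hAconv : ∀ j, HasAny (fun u v => v ∈ pvRow (pvAdj n results) u) i j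
        ↔ HasAny (EdgW n results) i j := by
      intro j
      constructor
      · exact hasAny_imp hadj_t
          (fun u v h1 h2 hm => (adj_row_iff n results hok u v h1 h2).1 hm) hi1 hi2
      · exact hasAny_imp htargE
          (fun u v h1 h2 he => (adj_row_iff n results hok u v h1 h2).2 he) hi1 hi2
    have hBconv : ∀ j, HasAny (fun u v => v ∈ pvRow (pvRadj n results) u) i j
        ↔ HasAny (fun u v => EdgW n results v u) i j := by
      intro j
      constructor
      · exact hasAny_imp hradj_t
          (fun u v h1 h2 hm => (radj_row_iff n results hok u v h1 h2).1 hm) hi1 hi2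
      · exact hasAny_imp htargE'
          (fun u v h1 h2 he => (radj_row_iff n results hok u v h1 h2).2 he) hi1 hi2
    -- the two counts agree
    have hmain : ∀ j, j ∈ PySem.Set.union (pvReach n (pvAdj n results) i)
          (pvReach n (pvRadj n results) i)
        ↔ j ∈ PySem.List.pyRange 1 (n+1)
          ∧ (¬ pvF3 n results i j = 1000000000 ∨ ¬ pvF3 n results j i = 1000000000) := by
      intro j
      rw [PySem.Set.mem_union, hfwd j, hbwd j,
        ← hasAny_iff_rle hadj_t ⟨hi1, hi2⟩, ← hasAny_iff_rle hradj_t ⟨hi1, hi2⟩,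
        hAconv j, hBconv j,
        hasAny_flip (E := EdgW n results) (a := i) (b := j)]
      constructor
      · intro hP
        have hjb : 1 ≤ j ∧ j ≤ n := by
          rcases hP with hP | hP
          · obtain ⟨w, hw⟩ := hP
            have hjw : j ∈ w := List.mem_of_getLast? hw.2.2
            rcases mem_chain_head_or_edge hw.1 hw.2.1 hjw with rfl | ⟨u, hu⟩
            · exact ⟨hi1, hi2⟩
            · exact htargE u j hu
          · rcases hasAny_endpoints hP with rfl | ⟨v, hv⟩
            · exact ⟨hi1, hi2⟩
            · exact hsrcE j v hv
        refine ⟨PySem.List.mem_pyRange_one.2 ⟨hjb.1, by omega⟩, ?_⟩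
        rcases hP with hP | hP
        · left
          exact (good_ne_iff hES hS' (hInvN i j hi1 hi2 hjb.1 hjb.2)).2
            ((hasW_iff_hasAny htargE ⟨hi1, hi2⟩).2 hP)
        · right
          exact (good_ne_iff hES hS' (hInvN j i hjb.1 hjb.2 hi1 hi2)).2
            ((hasW_iff_hasAny htargE ⟨hjb.1, hjb.2⟩).2 hP)
      · rintro ⟨hjr, hP⟩
        rcases PySem.List.mem_pyRange_one.1 hjr with ⟨hj1, hj2'⟩
        have hj2 : j ≤ n := by omega
        rcases hP with hP | hP
        · left
          exact (hasW_iff_hasAny htargE ⟨hi1, hi2⟩).1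
            ((good_ne_iff hES hS' (hInvN i j hi1 hi2 hj1 hj2)).1 hP)
        · right
          exact (hasW_iff_hasAny htargE ⟨hj1, hj2⟩).1
            ((good_ne_iff hES hS' (hInvN j i hj1 hj2 hi1 hi2)).1 hP)
    rw [count_len_eq (PySem.List.pyRange 1 (n+1)) (PySem.List.nodup_pyRange_one 1 (n+1)) _
      (PySem.Set.union (pvReach n (pvAdj n results) i) (pvReach n (pvRadj n results) i))
      (PySem.Set.nodup_union _ _ hfwdnd) hmain]
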